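-- pv_equiv track=rewrite | github.com/yyytae0/algorithm-training | programmers/2-3.py | solution
-- ===== SOURCE A (Python) =====
-- from collections import deque
--
-- def bfs(a, b, n, m, maps, visit):
--     way = [[1, 0], [-1, 0], [0, 1], [0, -1]]
--     q = deque()
--     food = int(maps[a][b])
--     q.append([a, b])
--     visit[a][b] = 1
--     while q:
--         v = q.popleft()
--         for i in way:
--             nv = [v[0]+i[0], v[1]+i[1]]
--             if 0 <= nv[0] < n and 0 <= nv[1] < m and maps[nv[0]][nv[1]].isdigit() and not visit[nv[0]][nv[1]]:
--                 q.append(nv)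
--                 visit[nv[0]][nv[1]] = 1
--                 food += int(maps[nv[0]][nv[1]])
--     return food
--
-- def solution(maps):
--     n = len(maps)
--     m = len(maps[0])
--     visit = [[0 for _ in range(m)] for _ in range(n)]
--     answer = []
--     for i in range(n):
--         for j in range(m):
--             if maps[i][j].isdigit() and not visit[i][j]:
--                 d = bfs(i, j, n, m, maps, visit)
--                 answer.append(d)
--     if answer:
--         answer.sort()
--         return answer
--     else:
--         return [-1]
-- ===== SOURCE B (Python) =====
-- def solution(maps):
--     # Single raster pass with eager-merge ("quick-find") component labeling:
--     # no BFS/DFS, no frontier, no visited matrix.  Each digit cell gets the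
--     # label of its component-so-far (the smallest linear index i*m+j in it);
--     # when a cell joins two differently-labeled classes the larger label is
--     # rewritten to the smaller one everywhere.  A second pass groups the
--     # digit values by label; labels appear in first-cell scan order.
--     n = len(maps)
--     m = len(maps[0])
--     labels = {}
--     for i in range(n):
--         for j in range(m):
--             if maps[i][j].isdigit():
--                 cand = []
--                 if (i, j - 1) in labels:
--                     cand.append(labels[(i, j - 1)])
--                 if (i - 1, j) in labels:
--                     cand.append(labels[(i - 1, j)])
--                 if not cand:
--                     labels[(i, j)] = i * m + j
--                 else:
--                     keep = min(cand)
--                     labels[(i, j)] = keep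
--                     for other in cand:
--                         if other != keep:
--                             labels = {p: (keep if l == other else l)
--                                       for p, l in labels.items()}
--     sums = {}
--     for (i, j), l in labels.items():
--         sums[l] = sums.get(l, 0) + int(maps[i][j])
--     return sorted(sums.values()) if sums else [-1]
-- ===== Notes on version B (the rewrite author's own statement) =====
-- stated objective: alternative
-- what changed: Replaces A's per-seed BFS flood fill (deque frontier + 0/1 visit matrix) by connected-component labeling with a quick-find disjoint set kept as a cell->label dict: one raster pass unions each digit cell with its already-labeled left/up neighbours (eagerly rewriting the larger label to the smaller), then one grouping pass sums digit values per label; there is no search, frontier or visited matrix at all.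
-- outside the precondition, e.g. on solution([]): A raises IndexError, B raises IndexError; on solution(['12', '3']): A raises IndexError, B raises IndexError
import Mathlib
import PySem

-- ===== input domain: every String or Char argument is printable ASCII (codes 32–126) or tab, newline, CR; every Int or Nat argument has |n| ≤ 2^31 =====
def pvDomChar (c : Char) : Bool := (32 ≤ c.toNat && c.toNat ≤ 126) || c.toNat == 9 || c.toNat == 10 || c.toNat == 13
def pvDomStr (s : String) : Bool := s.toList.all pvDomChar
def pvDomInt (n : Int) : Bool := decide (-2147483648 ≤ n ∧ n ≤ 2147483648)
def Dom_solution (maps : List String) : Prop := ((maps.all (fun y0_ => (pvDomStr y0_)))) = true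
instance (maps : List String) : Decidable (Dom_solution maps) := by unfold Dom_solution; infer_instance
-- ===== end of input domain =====

-- B replaces A's per-seed BFS flood fill (deque + 0/1 visit matrix) by connected-component
-- labeling with a quick-find disjoint set held in a cell→label dict: one raster pass unions each
-- digit cell with its already-labeled left/up neighbours (eagerly rewriting the larger label to
-- the smaller), then one grouping pass sums digit values per label; equal return value proved on
-- Pre_ (the inputs where the Python A returns).

-- ===== PORT A =====
-- maps[x][y] : the character at row x, column y (every use is guarded in range; getD never fires on Pre_)
def pvCellA (maps : List String) (x y : Int) : Char :=
  (PySem.Str.pyGet? ((PySem.List.pyGet? maps x).getD "") y).getD ' '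

-- int(maps[a][b]) for a digit character (guarded by isdigit; getD never fires)
def pvIntA (c : Char) : Int := (PySem.Int.ofChars? [c]).getD 0

-- visit[x][y] (indices are guarded 0 ≤ · < bound at every use, so plain Nat indexing is exact)
def pvVGet (visit : List (List Int)) (x y : Int) : Int := (visit.getD x.toNat []).getD y.toNat 0

-- visit[x][y] = 1
def pvVSet (visit : List (List Int)) (x y : Int) : List (List Int) :=
  visit.set x.toNat ((visit.getD x.toNat []).set y.toNat 1)

-- body of 'for i in way: if …: append/mark/add' for one direction i
def pvNbrA (maps : List String) (n m : Int) (v : Int × Int)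
    (st : List (Int × Int) × List (List Int) × Int) (d : Int × Int) :
    List (Int × Int) × List (List Int) × Int :=
  let x := v.1 + d.1
  let y := v.2 + d.2
  if 0 ≤ x ∧ x < n ∧ 0 ≤ y ∧ y < m ∧ PySem.Chars.isdigit (pvCellA maps x y) = true ∧ pvVGet st.2.1 x y = 0 then
    (st.1 ++ [(x, y)], pvVSet st.2.1 x y, st.2.2 + pvIntA (pvCellA maps x y))
  else st

-- 'while q:' of bfs; the fuel only makes the recursion structural, it is proven never to run out
def pvBfsLoopA (maps : List String) (n m : Int) :
    Nat → List (Int × Int) → List (List Int) → Int → Int × List (List Int)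
  | 0, _, visit, food => (food, visit)
  | _ + 1, [], visit, food => (food, visit)
  | fuel + 1, v :: q, visit, food =>
    let st := [((1 : Int), (0 : Int)), (-1, 0), (0, 1), (0, -1)].foldl (pvNbrA maps n m v) (q, visit, food)
    pvBfsLoopA maps n m fuel st.1 st.2.1 st.2.2

-- bfs(a, b, n, m, maps, visit)
def pvBfsA (maps : List String) (n m a b : Int) (visit : List (List Int)) : Int × List (List Int) :=
  pvBfsLoopA maps n m (2 * (n.toNat * m.toNat) + 2) [(a, b)] (pvVSet visit a b) (pvIntA (pvCellA maps a b))

def solution (maps : List String) : List Int :=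
  let n : Int := maps.length
  let m : Int := PySem.Str.len ((PySem.List.pyGet? maps 0).getD "")
  let visit0 : List (List Int) := List.replicate n.toNat (List.replicate m.toNat (0 : Int))
  let st := (PySem.List.pyRange 0 n 1).foldl (fun st i =>
      (PySem.List.pyRange 0 m 1).foldl (fun st j =>
        if PySem.Chars.isdigit (pvCellA maps i j) = true ∧ pvVGet st.2 i j = 0 then
          let r := pvBfsA maps n m i j st.2
          (st.1 ++ [r.1], r.2)
        else st) st) (([] : List Int), visit0)
  if st.1 ≠ [] then PySem.List.sorted st.1 (fun x => x) false else [-1]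

-- ===== PORT B =====
-- B reads cells with the same guarded accesses pvCellA / pvIntA as A

-- labels = {p: (keep if l == other else l) for p, l in labels.items()}
def pvRewriteB (labels : PySem.Dict (Int × Int) Int) (keep other : Int) : PySem.Dict (Int × Int) Int :=
  PySem.Dict.mk (labels.items.map (fun pl => (pl.1, if pl.2 = other then keep else pl.2)))

-- the body of B's raster scan for one cell (i, j)
def pvCellStepB (maps : List String) (m : Int) (labels : PySem.Dict (Int × Int) Int) (i j : Int) :
    PySem.Dict (Int × Int) Int :=
  if PySem.Chars.isdigit (pvCellA maps i j) = true then
    let cand : List Int := []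
    let cand := if labels.contains (i, j - 1) then cand ++ [labels.getD (i, j - 1) 0] else cand
    let cand := if labels.contains (i - 1, j) then cand ++ [labels.getD (i - 1, j) 0] else cand
    if cand = [] then labels.insert (i, j) (i * m + j)
    else
      let keep := PySem.List.minD cand (fun x => x) 0
      let labels := labels.insert (i, j) keep
      cand.foldl (fun labels other => if other ≠ keep then pvRewriteB labels keep other else labels) labels
  else labels

def solution_alt (maps : List String) : List Int :=
  let n : Int := maps.length
  let m : Int := PySem.Str.len ((PySem.List.pyGet? maps 0).getD "")
  let labels := (PySem.List.pyRange 0 n 1).foldl (fun labels i =>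
      (PySem.List.pyRange 0 m 1).foldl (fun labels j => pvCellStepB maps m labels i j) labels)
    PySem.Dict.empty
  let sums := labels.items.foldl (fun sums pl =>
      sums.insert pl.2 (sums.getD pl.2 0 + pvIntA (pvCellA maps pl.1.1 pl.1.2))) PySem.Dict.empty
  if sums.items ≠ [] then PySem.List.sorted sums.values (fun x => x) false else [-1]

-- ===== PRECONDITION & SPEC =====
-- Pre_ excludes exactly the inputs where the Python A raises: maps == [] (maps[0] IndexError) and
-- ragged inputs where some row is shorter than the first row (maps[i][j] IndexError for j < m).
def Pre_solution (maps : List String) : Prop :=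
  maps ≠ [] ∧ ∀ s ∈ maps, (maps.headD "").toList.length ≤ s.toList.length
instance (maps : List String) : Decidable (Pre_solution maps) := by unfold Pre_solution; infer_instance

def pvWitness_solution : List String := ["12X", "3X45"]

def Spec_solution (maps : List String) (out : List Int) : Prop := out = solution_alt maps
instance (maps : List String) (out : List Int) : Decidable (Spec_solution maps out) := by unfold Spec_solution; infer_instance

-- ===== CLAIM (what is proved, stated in full; the proofs are below) =====
def Claim_equal_solution : Prop := ∀ (maps : List String), Dom_solution maps → Pre_solution maps → Spec_solution maps (solution maps)

-- ===== LEMMAS AND PROOFS =====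

-- ---------- proof-side notions: grid, digit cells, neighbours, BFS reachability ----------

noncomputable def pvGrid (n m : Int) : Finset (Int × Int) := Finset.Icc 0 (n - 1) ×ˢ Finset.Icc 0 (m - 1)

def pvGood (maps : List String) (n m : Int) (p : Int × Int) : Prop :=
  0 ≤ p.1 ∧ p.1 < n ∧ 0 ≤ p.2 ∧ p.2 < m ∧ PySem.Chars.isdigit (pvCellA maps p.1 p.2) = true

def pvNbrs (v : Int × Int) : List (Int × Int) :=
  [(v.1 + 1, v.2), (v.1 - 1, v.2), (v.1, v.2 + 1), (v.1, v.2 - 1)]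

-- cells reachable from the worklist S through unvisited (w.r.t. V) digit cells
inductive pvReach (maps : List String) (n m : Int) (V : Int × Int → Prop) :
    List (Int × Int) → (Int × Int) → Prop
  | base {S : List (Int × Int)} {p : Int × Int} : p ∈ S → pvReach maps n m V S p
  | step {S : List (Int × Int)} {p q : Int × Int} :
      pvReach maps n m V S p → q ∈ pvNbrs p → pvGood maps n m q → ¬ V q → pvReach maps n m V S q

def pvVal (maps : List String) (p : Int × Int) : Int := pvIntA (pvCellA maps p.1 p.2)

def pvShape (n m : Int) (visit : List (List Int)) : Prop :=
  visit.length = n.toNat ∧ ∀ row ∈ visit, row.length = m.toNat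

-- marked cells of A's visit matrix, as a finite set of positions
noncomputable def pvMA (n m : Int) (visit : List (List Int)) : Finset (Int × Int) :=
  (pvGrid n m).filter (fun p => pvVGet visit p.1 p.2 ≠ 0)

lemma mem_pvGrid {n m : Int} {p : Int × Int} :
    p ∈ pvGrid n m ↔ 0 ≤ p.1 ∧ p.1 < n ∧ 0 ≤ p.2 ∧ p.2 < m := by
  obtain ⟨a, b⟩ := p
  simp only [pvGrid, Finset.mem_product, Finset.mem_Icc]
  omega

lemma pvGrid_card (n m : Int) : (pvGrid n m).card = n.toNat * m.toNat := by
  simp [pvGrid, Int.card_Icc]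

lemma pvGood_mem_grid {maps : List String} {n m : Int} {p : Int × Int}
    (h : pvGood maps n m p) : p ∈ pvGrid n m := by
  rcases h with ⟨h1, h2, h3, h4, _⟩; exact mem_pvGrid.mpr ⟨h1, h2, h3, h4⟩

lemma pvMA_subset {n m : Int} (visit : List (List Int)) : pvMA n m visit ⊆ pvGrid n m :=
  Finset.filter_subset _ _

lemma mem_pvMA {n m : Int} {visit : List (List Int)} {p : Int × Int} :
    p ∈ pvMA n m visit ↔ p ∈ pvGrid n m ∧ pvVGet visit p.1 p.2 ≠ 0 := by
  simp [pvMA]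

lemma pvNbrs_pairwise (v : Int × Int) : (pvNbrs v).Pairwise (· ≠ ·) := by
  obtain ⟨a, b⟩ := v
  simp only [pvNbrs]
  refine List.Pairwise.cons ?_ (List.Pairwise.cons ?_ (List.Pairwise.cons ?_ (List.pairwise_singleton _ _))) <;>
  · intro w hw
    fin_cases hw <;>
    · intro h
      rw [Prod.ext_iff] at h
      obtain ⟨h1, h2⟩ := h
      omega

-- ---------- visit-matrix primitives ----------

lemma pvShape_vset {n m : Int} {visit : List (List Int)} {x y : Int}
    (hs : pvShape n m visit) : pvShape n m (pvVSet visit x y) := by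
  by_cases hx : x.toNat < visit.length
  · constructor
    · simpa [pvVSet] using hs.1
    · intro row hrow
      rcases List.mem_or_eq_of_mem_set hrow with h | h
      · exact hs.2 row h
      · subst h
        simp only [List.getD_eq_getElem?_getD, List.getElem?_eq_getElem hx, Option.getD_some]
        simpa using hs.2 _ (List.getElem_mem hx)
  · unfold pvVSet
    rw [List.set_eq_of_length_le (by omega)]
    exact hs

lemma pvVGet_vset_self {n m : Int} {visit : List (List Int)} {x y : Int}
    (hs : pvShape n m visit) (hx0 : 0 ≤ x) (hxn : x < n) (hy0 : 0 ≤ y) (hym : y < m) :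
    pvVGet (pvVSet visit x y) x y = 1 := by
  have hlen := hs.1
  have hx : x.toNat < visit.length := by omega
  have hval : visit[x.toNat]?.getD [] = visit[x.toNat] := by
    rw [List.getElem?_eq_getElem hx, Option.getD_some]
  have hrow : (visit[x.toNat]).length = m.toNat := hs.2 _ (List.getElem_mem hx)
  have hy : y.toNat < (visit[x.toNat]).length := by omega
  unfold pvVGet pvVSet
  simp only [List.getD_eq_getElem?_getD]
  rw [List.getElem?_set_self hx, Option.getD_some, hval, List.getElem?_set_self hy,
    Option.getD_some]

lemma pvVGet_vset_ne {visit : List (List Int)} {x y x' y' : Int}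
    (h0 : 0 ≤ x) (h1 : 0 ≤ y) (h2 : 0 ≤ x') (h3 : 0 ≤ y') (hne : (x', y') ≠ (x, y)) :
    pvVGet (pvVSet visit x y) x' y' = pvVGet visit x' y' := by
  by_cases hxx : x'.toNat = x.toNat
  · have hx' : x' = x := by omega
    subst hx'
    have hyy : y.toNat ≠ y'.toNat := by
      have : y' ≠ y := fun h => hne (by rw [h])
      omega
    by_cases hx : x'.toNat < visit.length
    · unfold pvVGet pvVSet
      simp only [List.getD_eq_getElem?_getD]
      rw [List.getElem?_set_self hx, Option.getD_some, List.getElem?_set_ne hyy]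
    · unfold pvVSet
      rw [List.set_eq_of_length_le (by omega)]
  · unfold pvVGet pvVSet
    simp only [List.getD_eq_getElem?_getD]
    rw [List.getElem?_set_ne (fun h => hxx h.symm)]

lemma pvMA_vset {maps : List String} {n m : Int} {visit : List (List Int)} {p : Int × Int}
    (hs : pvShape n m visit) (hp : pvGood maps n m p) :
    pvMA n m (pvVSet visit p.1 p.2) = insert p (pvMA n m visit) := by
  obtain ⟨hp1, hp2, hp3, hp4, _⟩ := hp
  apply Finset.ext
  intro q
  rw [Finset.mem_insert, mem_pvMA, mem_pvMA]
  by_cases hq : q ∈ pvGrid n m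
  · have hqb := mem_pvGrid.mp hq
    by_cases hqp : q = p
    · subst hqp
      have := pvVGet_vset_self (visit := visit) hs hp1 hp2 hp3 hp4
      simp [hq, this]
    · have hne : (q.1, q.2) ≠ (p.1, p.2) := by
        intro h
        exact hqp (Prod.ext (congrArg Prod.fst h) (congrArg Prod.snd h))
      rw [pvVGet_vset_ne hp1 hp3 hqb.1 hqb.2.2.1 hne]
      simp [hq, hqp]
  · have hqp : q ≠ p := by
      intro h; subst h
      exact hq (mem_pvGrid.mpr ⟨hp1, hp2, hp3, hp4⟩)
    simp [hq, hqp]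

lemma pvMA_replicate (n m : Int) : pvMA n m (List.replicate n.toNat (List.replicate m.toNat (0 : Int))) = ∅ := by
  apply Finset.ext
  intro p
  rw [mem_pvMA]
  suffices h : pvVGet (List.replicate n.toNat (List.replicate m.toNat (0 : Int))) p.1 p.2 = 0 by
    simp [h]
  unfold pvVGet
  simp only [List.getD_eq_getElem?_getD, List.getElem?_replicate]
  split_ifs <;> simp

lemma pvShape_replicate (n m : Int) : pvShape n m (List.replicate n.toNat (List.replicate m.toNat (0 : Int))) := by
  refine ⟨by simp, fun row h => ?_⟩
  simp [List.eq_of_mem_replicate h]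

-- ---------- BFS-reachability lemmas ----------

lemma pvReach_nil {maps : List String} {n m : Int} {V : Int × Int → Prop} {p : Int × Int}
    (h : pvReach maps n m V [] p) : False := by
  induction h with
  | base h => simp at h
  | step _ _ _ _ ih => exact ih

lemma pvReach_congr {maps : List String} {n m : Int} {V W : Int × Int → Prop}
    {S T : List (Int × Int)} (hV : ∀ p, V p ↔ W p) (hS : ∀ p, p ∈ S ↔ p ∈ T) {p : Int × Int}
    (h : pvReach maps n m V S p) : pvReach maps n m W T p := by
  induction h with
  | base h => exact pvReach.base ((hS _).mp h)
  | step _ hnb hg hv ih => exact pvReach.step ih hnb hg (fun hw => hv ((hV _).mpr hw))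

lemma pvReach_of_ws {maps : List String} {n m : Int} {V : Int × Int → Prop}
    {S : List (Int × Int)} {v w : Int × Int} (hvS : v ∈ S)
    (hw : w ∈ pvNbrs v ∧ pvGood maps n m w ∧ ¬ V w) :
    pvReach maps n m V S w :=
  pvReach.step (pvReach.base hvS) hw.1 hw.2.1 hw.2.2

lemma pvReach_out {maps : List String} {n m : Int} {V : Int × Int → Prop}
    {S rest ws : List (Int × Int)} {v : Int × Int}
    (hmem : ∀ p, p ∈ S ↔ p = v ∨ p ∈ rest)
    (hws : ∀ w, w ∈ ws ↔ w ∈ pvNbrs v ∧ pvGood maps n m w ∧ ¬ V w)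
    {p : Int × Int} (h : pvReach maps n m V S p) :
    p = v ∨ p ∈ rest ∨ (¬ V p ∧ (p ∈ ws ∨ pvReach maps n m (fun q => V q ∨ q ∈ ws) (rest ++ ws) p)) := by
  induction h with
  | base h =>
    rcases (hmem _).mp h with h | h
    · exact Or.inl h
    · exact Or.inr (Or.inl h)
  | step hr hnb hg hv ih =>
    rename_i r q
    right; right
    refine ⟨hv, ?_⟩
    rcases ih with rfl | hR | ⟨hnVr, hws'⟩
    · exact Or.inl ((hws _).mpr ⟨hnb, hg, hv⟩)
    · by_cases hqw : q ∈ ws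
      · exact Or.inl hqw
      · refine Or.inr (pvReach.step (pvReach.base (List.mem_append.mpr (Or.inl hR))) hnb hg ?_)
        rintro (h | h)
        · exact hv h
        · exact hqw h
    · have hr' : pvReach maps n m (fun q => V q ∨ q ∈ ws) (rest ++ ws) r :=
        hws'.elim (fun h => pvReach.base (List.mem_append.mpr (Or.inr h))) id
      by_cases hqw : q ∈ ws
      · exact Or.inl hqw
      · refine Or.inr (pvReach.step hr' hnb hg ?_)
        rintro (h | h)
        · exact hv h
        · exact hqw h

lemma pvReach_in {maps : List String} {n m : Int} {V : Int × Int → Prop}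
    {S rest ws : List (Int × Int)} {v : Int × Int}
    (hvS : v ∈ S) (hrest : ∀ p ∈ rest, p ∈ S)
    (hws : ∀ w ∈ ws, w ∈ pvNbrs v ∧ pvGood maps n m w ∧ ¬ V w)
    {p : Int × Int} (h : pvReach maps n m (fun q => V q ∨ q ∈ ws) (rest ++ ws) p) :
    pvReach maps n m V S p := by
  induction h with
  | base h =>
    rcases List.mem_append.mp h with h | h
    · exact pvReach.base (hrest _ h)
    · exact pvReach_of_ws hvS (hws _ h)
  | step _ hnb hg hv ih =>
    exact pvReach.step ih hnb hg (fun hw => hv (Or.inl hw))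

-- ---------- one round of the neighbour loop ----------

-- the effect of A's inner 'for i in way' loop, restated on neighbour positions
def pvStepA (maps : List String) (n m : Int)
    (st : List (Int × Int) × List (List Int) × Int) (w : Int × Int) :
    List (Int × Int) × List (List Int) × Int :=
  if 0 ≤ w.1 ∧ w.1 < n ∧ 0 ≤ w.2 ∧ w.2 < m ∧ PySem.Chars.isdigit (pvCellA maps w.1 w.2) = true ∧ pvVGet st.2.1 w.1 w.2 = 0 then
    (st.1 ++ [w], pvVSet st.2.1 w.1 w.2, st.2.2 + pvIntA (pvCellA maps w.1 w.2))
  else st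

lemma pvNbrA_fold_eq (maps : List String) (n m : Int) (v : Int × Int)
    (st : List (Int × Int) × List (List Int) × Int) :
    [((1 : Int), (0 : Int)), (-1, 0), (0, 1), (0, -1)].foldl (pvNbrA maps n m v) st =
      (pvNbrs v).foldl (pvStepA maps n m) st := by
  simp only [pvNbrA, pvStepA, pvNbrs, List.foldl, sub_eq_add_neg, add_zero]

lemma pvGuardA_iff {maps : List String} {n m : Int} {visit : List (List Int)} (w : Int × Int) :
    (0 ≤ w.1 ∧ w.1 < n ∧ 0 ≤ w.2 ∧ w.2 < m ∧ PySem.Chars.isdigit (pvCellA maps w.1 w.2) = true ∧ pvVGet visit w.1 w.2 = 0)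
      ↔ (pvGood maps n m w ∧ w ∉ pvMA n m visit) := by
  constructor
  · rintro ⟨h1, h2, h3, h4, h5, h6⟩
    refine ⟨⟨h1, h2, h3, h4, h5⟩, fun hmem => ?_⟩
    exact (mem_pvMA.mp hmem).2 h6
  · rintro ⟨⟨h1, h2, h3, h4, h5⟩, hnot⟩
    refine ⟨h1, h2, h3, h4, h5, ?_⟩
    by_contra h6
    exact hnot (mem_pvMA.mpr ⟨mem_pvGrid.mpr ⟨h1, h2, h3, h4⟩, h6⟩)

lemma pvFoldA_spec (maps : List String) (n m : Int) :
    ∀ (cands : List (Int × Int)) (q : List (Int × Int)) (visit : List (List Int)) (food : Int),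
    pvShape n m visit → cands.Pairwise (· ≠ ·) →
    ∃ (ws : List (Int × Int)) (visit' : List (List Int)),
      cands.foldl (pvStepA maps n m) (q, visit, food) =
        (q ++ ws, visit', food + (ws.map (pvVal maps)).sum) ∧
      pvShape n m visit' ∧
      pvMA n m visit' = pvMA n m visit ∪ ws.toFinset ∧
      ws.Nodup ∧
      (∀ w, w ∈ ws ↔ w ∈ cands ∧ pvGood maps n m w ∧ w ∉ pvMA n m visit) := by
  intro cands
  induction cands with
  | nil =>
    intro q visit food hs _
    exact ⟨[], visit, by simp, hs, by simp, List.nodup_nil, by simp⟩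
  | cons c cs ih =>
    intro q visit food hs hpw
    have hpw_head : ∀ w ∈ cs, c ≠ w := (List.pairwise_cons.mp hpw).1
    have hpw_tail : cs.Pairwise (· ≠ ·) := (List.pairwise_cons.mp hpw).2
    rw [List.foldl_cons]
    by_cases hguard : 0 ≤ c.1 ∧ c.1 < n ∧ 0 ≤ c.2 ∧ c.2 < m ∧ PySem.Chars.isdigit (pvCellA maps c.1 c.2) = true ∧ pvVGet visit c.1 c.2 = 0
    · obtain ⟨hgood, hcnot⟩ := (pvGuardA_iff (visit := visit) c).mp hguard
      have hstep : pvStepA maps n m (q, visit, food) c =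
          (q ++ [c], pvVSet visit c.1 c.2, food + pvIntA (pvCellA maps c.1 c.2)) := by
        simp [pvStepA, hguard]
      rw [hstep]
      have hs1 : pvShape n m (pvVSet visit c.1 c.2) := pvShape_vset hs
      have hM1 : pvMA n m (pvVSet visit c.1 c.2) = insert c (pvMA n m visit) :=
        pvMA_vset hs hgood
      obtain ⟨ws1, visit', heq, hshape', hM', hnd1, hmem1⟩ :=
        ih (q ++ [c]) (pvVSet visit c.1 c.2) (food + pvIntA (pvCellA maps c.1 c.2)) hs1 hpw_tail
      refine ⟨c :: ws1, visit', ?_, hshape', ?_, ?_, ?_⟩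
      · rw [heq]
        simp [pvVal, add_assoc]
      · rw [hM', hM1]
        apply Finset.ext
        intro w
        simp only [Finset.mem_union, Finset.mem_insert, List.toFinset_cons, List.mem_toFinset]
        tauto
      · refine List.Nodup.cons (fun hc => ?_) hnd1
        exact hpw_head c ((hmem1 c).mp hc).1 rfl
      · intro w
        simp only [List.mem_cons]
        constructor
        · rintro (rfl | hw)
          · exact ⟨Or.inl rfl, hgood, hcnot⟩
          · obtain ⟨hwcs, hwg, hwnot⟩ := (hmem1 w).mp hw
            rw [hM1] at hwnot
            exact ⟨Or.inr hwcs, hwg, fun h => hwnot (Finset.mem_insert_of_mem h)⟩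
        · rintro ⟨(rfl | hwcs), hwg, hwnot⟩
          · exact Or.inl rfl
          · refine Or.inr ((hmem1 w).mpr ⟨hwcs, hwg, ?_⟩)
            rw [hM1]
            intro h
            rcases Finset.mem_insert.mp h with rfl | h
            · exact hpw_head _ hwcs rfl
            · exact hwnot h
    · have hstep : pvStepA maps n m (q, visit, food) c = (q, visit, food) := by
        simp only [pvStepA]
        rw [if_neg hguard]
      rw [hstep]
      obtain ⟨ws1, visit', heq, hshape', hM', hnd1, hmem1⟩ := ih q visit food hs hpw_tail
      refine ⟨ws1, visit', heq, hshape', hM', hnd1, ?_⟩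
      intro w
      rw [hmem1 w]
      constructor
      · rintro ⟨hwcs, hwg, hwnot⟩
        exact ⟨List.mem_cons_of_mem _ hwcs, hwg, hwnot⟩
      · rintro ⟨hwc, hwg, hwnot⟩
        rcases List.mem_cons.mp hwc with rfl | hwcs
        · exact absurd ((pvGuardA_iff (visit := visit) w).mpr ⟨hwg, hwnot⟩) hguard
        · exact ⟨hwcs, hwg, hwnot⟩

-- ---------- the whole BFS worklist loop ----------

lemma pvBfsLoopA_spec (maps : List String) (n m : Int) (fuel : Nat) :
    ∀ (q : List (Int × Int)) (visit : List (List Int)) (food : Int),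
    pvShape n m visit →
    (∀ p ∈ q, p ∈ pvMA n m visit) →
    2 * ((pvGrid n m).card - (pvMA n m visit).card) + q.length ≤ fuel →
    pvShape n m (pvBfsLoopA maps n m fuel q visit food).2 ∧
    (∀ p, p ∈ pvMA n m (pvBfsLoopA maps n m fuel q visit food).2 ↔
        p ∈ pvMA n m visit ∨ pvReach maps n m (· ∈ pvMA n m visit) q p) ∧
    (pvBfsLoopA maps n m fuel q visit food).1 =
      food + ((∑ p ∈ pvMA n m (pvBfsLoopA maps n m fuel q visit food).2, pvVal maps p)
           - (∑ p ∈ pvMA n m visit, pvVal maps p)) := by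
  induction fuel with
  | zero =>
    intro q visit food hs hq hfuel
    have hq0 : q = [] := List.eq_nil_of_length_eq_zero (by omega)
    subst hq0
    refine ⟨hs, fun p => ?_, by simp [pvBfsLoopA]⟩
    simp only [pvBfsLoopA]
    exact ⟨fun h => Or.inl h, fun h => h.elim id (fun h => absurd h pvReach_nil)⟩
  | succ fuel ih =>
    intro q visit food hs hq hfuel
    match q with
    | [] =>
      refine ⟨hs, fun p => ?_, by simp [pvBfsLoopA]⟩
      simp only [pvBfsLoopA]
      exact ⟨fun h => Or.inl h, fun h => h.elim id (fun h => absurd h pvReach_nil)⟩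
    | v :: rest =>
      obtain ⟨ws, visit1, heq, hs1, hM1, hndws, hmemws⟩ :=
        pvFoldA_spec maps n m (pvNbrs v) rest visit food hs (pvNbrs_pairwise v)
      have hrun : pvBfsLoopA maps n m (fuel + 1) (v :: rest) visit food =
          pvBfsLoopA maps n m fuel (rest ++ ws) visit1 (food + (ws.map (pvVal maps)).sum) := by
        show (let st := [((1 : Int), (0 : Int)), (-1, 0), (0, 1), (0, -1)].foldl (pvNbrA maps n m v) (rest, visit, food)
              pvBfsLoopA maps n m fuel st.1 st.2.1 st.2.2) = _
        rw [pvNbrA_fold_eq, heq]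
      have hdisj : Disjoint (pvMA n m visit) ws.toFinset := by
        rw [Finset.disjoint_right]
        intro w hw
        exact (((hmemws w).mp (List.mem_toFinset.mp hw))).2.2
      have hwsgrid : ws.toFinset ⊆ pvGrid n m := by
        intro w hw
        exact pvGood_mem_grid ((hmemws w).mp (List.mem_toFinset.mp hw)).2.1
      have hM1sub : pvMA n m visit1 ⊆ pvGrid n m := pvMA_subset _
      have hMsub : pvMA n m visit ⊆ pvGrid n m := pvMA_subset _
      have hcard1 : (pvMA n m visit1).card = (pvMA n m visit).card + ws.length := by
        rw [hM1, Finset.card_union_of_disjoint hdisj, List.toFinset_card_of_nodup hndws]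
      have hmemM1 : ∀ p, p ∈ pvMA n m visit1 ↔ p ∈ pvMA n m visit ∨ p ∈ ws := by
        intro p
        rw [hM1]
        simp [Finset.mem_union]
      have hq1 : ∀ p ∈ rest ++ ws, p ∈ pvMA n m visit1 := by
        intro p hp
        rcases List.mem_append.mp hp with hp | hp
        · exact (hmemM1 p).mpr (Or.inl (hq p (List.mem_cons_of_mem _ hp)))
        · exact (hmemM1 p).mpr (Or.inr hp)
      have hfuel1 : 2 * ((pvGrid n m).card - (pvMA n m visit1).card) + (rest ++ ws).length ≤ fuel := by
        have h1 : (pvMA n m visit1).card ≤ (pvGrid n m).card := Finset.card_le_card hM1sub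
        have h2 := List.length_append (as := rest) (bs := ws)
        simp only [List.length_cons] at hfuel
        omega
      obtain ⟨hs2, hiff2, hfood2⟩ :=
        ih (rest ++ ws) visit1 (food + (ws.map (pvVal maps)).sum) hs1 hq1 hfuel1
      rw [hrun]
      refine ⟨hs2, ?_, ?_⟩
      · intro p
        rw [hiff2 p]
        constructor
        · rintro (hp | hp)
          · rcases (hmemM1 p).mp hp with hp | hp
            · exact Or.inl hp
            · exact Or.inr (pvReach_of_ws (List.mem_cons_self) ((hmemws p).mp hp))
          · refine Or.inr (pvReach_in (List.mem_cons_self) (fun p hp => List.mem_cons_of_mem _ hp)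
              (fun w hw => (hmemws w).mp hw) (pvReach_congr (fun q => ?_) (fun _ => Iff.rfl) hp))
            rw [hmemM1 q]
        · rintro (hp | hp)
          · exact Or.inl ((hmemM1 p).mpr (Or.inl hp))
          · rcases pvReach_out (fun p => List.mem_cons) hmemws hp with rfl | hp | ⟨hnV, hp | hp⟩
            · exact Or.inl ((hmemM1 _).mpr (Or.inl (hq _ List.mem_cons_self)))
            · exact Or.inl ((hmemM1 p).mpr (Or.inl (hq _ (List.mem_cons_of_mem _ hp))))
            · exact Or.inl ((hmemM1 p).mpr (Or.inr hp))
            · refine Or.inr (pvReach_congr (fun q => ?_) (fun _ => Iff.rfl) hp)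
              rw [hmemM1 q]
      · rw [hfood2]
        have hsum1 : (∑ p ∈ pvMA n m visit1, pvVal maps p) =
            (∑ p ∈ pvMA n m visit, pvVal maps p) + (ws.map (pvVal maps)).sum := by
          rw [hM1, Finset.sum_union hdisj, List.sum_toFinset _ hndws]
        omega

-- ---------- the common graph layer: connectivity, components, minimal labels ----------

def pvIdx (m : Int) (p : Int × Int) : Int := p.1 * m + p.2

-- connectivity inside an allowed set S of cells (steps enter only allowed cells)
def pvRG (S : Int × Int → Prop) (p q : Int × Int) : Prop :=
  Relation.ReflTransGen (fun a b => S b ∧ b ∈ pvNbrs a) p q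

lemma pvNbrs_comm {p q : Int × Int} : q ∈ pvNbrs p ↔ p ∈ pvNbrs q := by
  obtain ⟨a, b⟩ := p; obtain ⟨c, d⟩ := q
  simp only [pvNbrs, List.mem_cons, List.mem_singleton, Prod.mk.injEq, List.not_mem_nil, or_false]
  omega

lemma pvRG_right {S : Int × Int → Prop} {p q : Int × Int} (h : pvRG S p q) : q = p ∨ S q := by
  induction h with
  | refl => exact Or.inl rfl
  | tail _ h2 _ => exact Or.inr h2.1

lemma pvRG_symm {S : Int × Int → Prop} {p q : Int × Int} (hp : S p) (h : pvRG S p q) :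
    pvRG S q p := by
  induction h with
  | refl => exact Relation.ReflTransGen.refl
  | @tail b c h1 h2 ih =>
    refine Relation.ReflTransGen.head ?_ ih
    refine ⟨?_, pvNbrs_comm.mp h2.2⟩
    rcases pvRG_right h1 with rfl | hb
    · exact hp
    · exact hb

lemma pvRG_mono {S T : Int × Int → Prop} (h : ∀ b, S b → T b) {p q : Int × Int}
    (hr : pvRG S p q) : pvRG T p q := by
  induction hr with
  | refl => exact Relation.ReflTransGen.refl
  | tail _ h2 ih => exact Relation.ReflTransGen.tail ih ⟨h _ h2.1, h2.2⟩

lemma pvRG_congr {S T : Int × Int → Prop} (h : ∀ b, S b ↔ T b) {p q : Int × Int} :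
    pvRG S p q ↔ pvRG T p q :=
  ⟨pvRG_mono (fun b hb => (h b).mp hb), pvRG_mono (fun b hb => (h b).mpr hb)⟩

-- merging a fresh cell c into the allowed set: the new component of c
def pvCpred (S : Int × Int → Prop) (c q : Int × Int) : Prop :=
  q = c ∨ ∃ nb, S nb ∧ nb ∈ pvNbrs c ∧ pvRG S nb q

lemma pvMerge_reach_c {S : Int × Int → Prop} {c q : Int × Int} :
    pvRG (fun b => S b ∨ b = c) c q ↔ pvCpred S c q := by
  constructor
  · intro h
    induction h with
    | refl => exact Or.inl rfl
    | @tail b q h1 h2 ih =>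
      rcases h2 with ⟨hS' | rfl, hadj⟩
      · rcases ih with rfl | ⟨nb, hnb1, hnb2, hnb3⟩
        · exact Or.inr ⟨q, hS', hadj, Relation.ReflTransGen.refl⟩
        · exact Or.inr ⟨nb, hnb1, hnb2, Relation.ReflTransGen.tail hnb3 ⟨hS', hadj⟩⟩
      · exact Or.inl rfl
  · rintro (rfl | ⟨nb, hnb1, hnb2, hnb3⟩)
    · exact Relation.ReflTransGen.refl
    · refine Relation.ReflTransGen.head ⟨Or.inl hnb1, hnb2⟩ ?_
      exact pvRG_mono (fun b hb => Or.inl hb) hnb3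

lemma pvMerge_unreach {S : Int × Int → Prop} {c p : Int × Int} (hp : S p)
    (hnc : ¬ pvCpred S c p) (q : Int × Int) :
    pvRG (fun b => S b ∨ b = c) p q ↔ pvRG S p q := by
  constructor
  · intro h
    induction h with
    | refl => exact Relation.ReflTransGen.refl
    | @tail b q h1 h2 ih =>
      rcases h2 with ⟨hS' | rfl, hadj⟩
      · exact Relation.ReflTransGen.tail ih ⟨hS', hadj⟩
      · exfalso
        have hSb : S b := by
          rcases pvRG_right ih with rfl | hb
          · exact hp
          · exact hb
        exact hnc (Or.inr ⟨b, hSb, pvNbrs_comm.mpr hadj, pvRG_symm hp ih⟩)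
  · exact pvRG_mono (fun b hb => Or.inl hb)

lemma pvMerge_inC {S : Int × Int → Prop} {c p : Int × Int} (hp : pvCpred S c p) (q : Int × Int) :
    pvRG (fun b => S b ∨ b = c) p q ↔ pvCpred S c q := by
  have hcp : pvRG (fun b => S b ∨ b = c) c p := pvMerge_reach_c.mpr hp
  constructor
  · intro h
    exact pvMerge_reach_c.mp (Relation.ReflTransGen.trans hcp h)
  · intro h
    have hpc : pvRG (fun b => S b ∨ b = c) p c := pvRG_symm (Or.inr rfl) hcp
    exact Relation.ReflTransGen.trans hpc (pvMerge_reach_c.mpr h)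

-- the component of p inside S, as a finite set, and its minimal scan index (the label)
noncomputable def pvClassF (n m : Int) (S : Int × Int → Prop) (p : Int × Int) : Finset (Int × Int) :=
  @Finset.filter _ (fun q => pvRG S p q) (fun q => Classical.propDecidable _) (pvGrid n m)

lemma mem_pvClassF {n m : Int} {S : Int × Int → Prop} {p q : Int × Int} :
    q ∈ pvClassF n m S p ↔ q ∈ pvGrid n m ∧ pvRG S p q := by
  simp [pvClassF, Finset.mem_filter]

noncomputable def pvLab (n m : Int) (S : Int × Int → Prop) (p : Int × Int) : Int :=
  @dite _ ((pvClassF n m S p).Nonempty) (Classical.propDecidable _)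
    (fun h => (pvClassF n m S p).inf' h (pvIdx m)) (fun _ => pvIdx m p)

lemma pvLab_spec {n m : Int} {S : Int × Int → Prop} {p : Int × Int} (hp : p ∈ pvGrid n m) :
    (∃ r ∈ pvClassF n m S p, pvIdx m r = pvLab n m S p) ∧
    ∀ q ∈ pvClassF n m S p, pvLab n m S p ≤ pvIdx m q := by
  have hne : (pvClassF n m S p).Nonempty :=
    ⟨p, mem_pvClassF.mpr ⟨hp, Relation.ReflTransGen.refl⟩⟩
  unfold pvLab
  rw [dif_pos hne]
  constructor
  · obtain ⟨r, hr, he⟩ := Finset.exists_mem_eq_inf' hne (pvIdx m)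
    exact ⟨r, hr, he.symm⟩
  · intro q hq
    exact Finset.inf'_le _ hq

lemma pvLab_eq_of {n m : Int} {S : Int × Int → Prop} {p : Int × Int} {v : Int}
    (hmem : ∃ r ∈ pvClassF n m S p, pvIdx m r = v)
    (hlb : ∀ q ∈ pvClassF n m S p, v ≤ pvIdx m q) :
    pvLab n m S p = v := by
  obtain ⟨r, hr, hrv⟩ := hmem
  have hne : (pvClassF n m S p).Nonempty := ⟨r, hr⟩
  unfold pvLab
  rw [dif_pos hne]
  apply le_antisymm
  · rw [← hrv]; exact Finset.inf'_le _ hr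
  · exact Finset.le_inf' _ _ hlb

lemma pvLab_congr {n m : Int} {S T : Int × Int → Prop} {p : Int × Int} (hp : p ∈ pvGrid n m)
    (h : ∀ q, pvRG S p q ↔ pvRG T p q) : pvLab n m S p = pvLab n m T p := by
  have hcl : pvClassF n m S p = pvClassF n m T p := by
    apply Finset.ext
    intro q
    rw [mem_pvClassF, mem_pvClassF, h q]
  obtain ⟨⟨r, hr, hrv⟩, hlb⟩ := pvLab_spec (S := T) (n := n) (m := m) (p := p) hp
  apply pvLab_eq_of
  · exact ⟨r, hcl ▸ hr, hrv⟩
  · intro q hq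
    exact hlb q (hcl ▸ hq)

lemma pvLab_le_idx {n m : Int} {S : Int × Int → Prop} {p : Int × Int} (hp : p ∈ pvGrid n m) :
    pvLab n m S p ≤ pvIdx m p :=
  (pvLab_spec hp).2 p (mem_pvClassF.mpr ⟨hp, Relation.ReflTransGen.refl⟩)

lemma pvIdx_inj {n m : Int} {p q : Int × Int} (hp : p ∈ pvGrid n m) (hq : q ∈ pvGrid n m)
    (h : pvIdx m p = pvIdx m q) : p = q := by
  obtain ⟨hp1, hp2, hp3, hp4⟩ := mem_pvGrid.mp hp
  obtain ⟨hq1, hq2, hq3, hq4⟩ := mem_pvGrid.mp hq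
  unfold pvIdx at h
  have h1 : (q.1 - p.1) * m = p.2 - q.2 := by ring_nf; linarith
  have hm : 0 < m := by omega
  have hfst : p.1 = q.1 := by
    rcases lt_trichotomy p.1 q.1 with hlt | he | hgt
    · have : 1 * m ≤ (q.1 - p.1) * m := by
        apply mul_le_mul_of_nonneg_right (by omega) (by omega)
      omega
    · exact he
    · have : 1 * m ≤ (p.1 - q.1) * m := by
        apply mul_le_mul_of_nonneg_right (by omega) (by omega)
      have h2 : (p.1 - q.1) * m = q.2 - p.2 := by ring_nf; linarith
      omega
  have hsnd : p.2 = q.2 := by rw [hfst] at h; omega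
  exact Prod.ext hfst hsnd

lemma pvClassF_eq_of_R {n m : Int} {S : Int × Int → Prop} {p q : Int × Int}
    (hp : S p) (hq : S q) (h : pvRG S p q) : pvClassF n m S p = pvClassF n m S q := by
  apply Finset.ext
  intro r
  rw [mem_pvClassF, mem_pvClassF]
  constructor
  · rintro ⟨hg, hr⟩
    exact ⟨hg, Relation.ReflTransGen.trans (pvRG_symm hp h) hr⟩
  · rintro ⟨hg, hr⟩
    exact ⟨hg, Relation.ReflTransGen.trans h hr⟩

lemma pvLab_eq_of_R {n m : Int} {S : Int × Int → Prop} {p q : Int × Int}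
    (hp : S p) (hq : S q) (hpg : q ∈ pvGrid n m) (h : pvRG S p q) :
    pvLab n m S p = pvLab n m S q := by
  have hcl := pvClassF_eq_of_R (n := n) (m := m) hp hq h
  obtain ⟨⟨r, hr, hrv⟩, hlb⟩ := pvLab_spec (S := S) (n := n) (m := m) (p := q) hpg
  apply pvLab_eq_of
  · exact ⟨r, hcl ▸ hr, hrv⟩
  · intro x hx
    exact hlb x (hcl ▸ hx)

lemma pvLab_inj {n m : Int} {S : Int × Int → Prop} {p q : Int × Int}
    (hSp : S p) (hSq : S q) (hp : p ∈ pvGrid n m) (hq : q ∈ pvGrid n m)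
    (h : pvLab n m S p = pvLab n m S q) : pvRG S p q := by
  obtain ⟨⟨rp, hrp, hrpv⟩, _⟩ := pvLab_spec (S := S) hp
  obtain ⟨⟨rq, hrq, hrqv⟩, _⟩ := pvLab_spec (S := S) hq
  have : rp = rq := by
    apply pvIdx_inj (mem_pvClassF.mp hrp).1 (mem_pvClassF.mp hrq).1
    rw [hrpv, hrqv, h]
  subst this
  have h1 : pvRG S p rp := (mem_pvClassF.mp hrp).2
  have h2 : pvRG S q rp := (mem_pvClassF.mp hrq).2
  exact Relation.ReflTransGen.trans h1 (pvRG_symm hSq h2)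

-- ---------- the raster scan order ----------

def pvGoodB (maps : List String) (n m : Int) (p : Int × Int) : Bool :=
  decide (0 ≤ p.1) && decide (p.1 < n) && decide (0 ≤ p.2) && decide (p.2 < m) &&
    PySem.Chars.isdigit (pvCellA maps p.1 p.2)

lemma pvGoodB_iff {maps : List String} {n m : Int} {p : Int × Int} :
    pvGoodB maps n m p = true ↔ pvGood maps n m p := by
  simp [pvGoodB, pvGood, and_assoc]

def pvPairs (n m : Int) : List (Int × Int) :=
  (PySem.List.pyRange 0 n 1).flatMap (fun i => (PySem.List.pyRange 0 m 1).map (fun j => (i, j)))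

lemma mem_pvPairs {n m : Int} {p : Int × Int} : p ∈ pvPairs n m ↔ p ∈ pvGrid n m := by
  obtain ⟨a, b⟩ := p
  simp only [pvPairs, List.mem_flatMap, List.mem_map, PySem.List.mem_pyRange_one, mem_pvGrid,
    Prod.mk.injEq]
  constructor
  · rintro ⟨i, hi, j, hj, rfl, rfl⟩
    omega
  · rintro ⟨h1, h2, h3, h4⟩
    exact ⟨a, by omega, b, by omega, rfl, rfl⟩

lemma pvIdx_lt_of {m : Int} {p q : Int × Int} (hp : 0 ≤ p.2 ∧ p.2 < m) (hq : 0 ≤ q.2 ∧ q.2 < m)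
    (h : p.1 < q.1 ∨ (p.1 = q.1 ∧ p.2 < q.2)) : pvIdx m p < pvIdx m q := by
  unfold pvIdx
  rcases h with h | ⟨h1, h2⟩
  · have : (p.1 + 1) * m ≤ q.1 * m := by
      apply mul_le_mul_of_nonneg_right (by omega) (by omega)
    nlinarith
  · rw [h1]; omega

lemma pvPairs_pairwise (n m : Int) :
    (pvPairs n m).Pairwise (fun p q => pvIdx m p < pvIdx m q) := by
  unfold pvPairs
  rw [List.pairwise_flatMap]
  constructor
  · intro i hi
    rw [List.pairwise_map]
    refine List.Pairwise.imp_of_mem ?_ (PySem.List.pairwise_lt_pyRange_one 0 m)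
    intro a b ha hb hab
    have ha' := PySem.List.mem_pyRange_one.mp ha
    have hb' := PySem.List.mem_pyRange_one.mp hb
    exact pvIdx_lt_of (by simp; omega) (by simp; omega) (Or.inr ⟨rfl, hab⟩)
  · refine List.Pairwise.imp_of_mem ?_ (PySem.List.pairwise_lt_pyRange_one 0 n)
    intro a b ha hb hab
    intro x hx y hy
    obtain ⟨jx, hjx, rfl⟩ := List.mem_map.mp hx
    obtain ⟨jy, hjy, rfl⟩ := List.mem_map.mp hy
    have hjx' := PySem.List.mem_pyRange_one.mp hjx
    have hjy' := PySem.List.mem_pyRange_one.mp hjy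
    exact pvIdx_lt_of (by simp; omega) (by simp; omega) (Or.inl hab)

lemma pvPairs_nodup (n m : Int) : (pvPairs n m).Nodup :=
  (pvPairs_pairwise n m).imp (fun h => by rintro rfl; omega)

-- facts available about a split pvPairs n m = u ++ c :: rest
lemma pvPrefix_facts {n m : Int} {u rest : List (Int × Int)} {c : Int × Int}
    (h : pvPairs n m = u ++ c :: rest) :
    c ∈ pvGrid n m ∧ (∀ p ∈ u, p ∈ pvGrid n m ∧ pvIdx m p < pvIdx m c) ∧
    (∀ q ∈ pvGrid n m, pvIdx m q < pvIdx m c → q ∈ u) ∧ c ∉ u := by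
  have hpw := pvPairs_pairwise n m
  rw [h] at hpw
  rw [List.pairwise_append] at hpw
  obtain ⟨hu, hcr, hcross⟩ := hpw
  have hcrest := List.pairwise_cons.mp hcr
  refine ⟨?_, ?_, ?_, ?_⟩
  · exact mem_pvPairs.mp (by rw [h]; exact List.mem_append.mpr (Or.inr List.mem_cons_self))
  · intro p hp
    refine ⟨mem_pvPairs.mp (by rw [h]; exact List.mem_append.mpr (Or.inl hp)), ?_⟩
    exact hcross p hp c List.mem_cons_self
  · intro q hq hlt
    have : q ∈ u ++ c :: rest := by rw [← h]; exact mem_pvPairs.mpr hq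
    rcases List.mem_append.mp this with hm | hm
    · exact hm
    · rcases List.mem_cons.mp hm with rfl | hm
      · omega
      · have := hcrest.1 q hm
        omega
  · intro hc
    have := hcross c hc c List.mem_cons_self
    omega

-- ---------- what A computes, abstractly ----------

-- every cell already belonging to a component of a scanned digit cell
noncomputable def pvMUF (maps : List String) (n m : Int) (u : List (Int × Int)) : Finset (Int × Int) :=
  @Finset.filter _ (fun q => ∃ p ∈ u, pvGood maps n m p ∧ pvRG (pvGood maps n m) p q)
    (fun q => Classical.propDecidable _) (pvGrid n m)

lemma mem_pvMUF {maps : List String} {n m : Int} {u : List (Int × Int)} {q : Int × Int} :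
    q ∈ pvMUF maps n m u ↔
      q ∈ pvGrid n m ∧ ∃ p ∈ u, pvGood maps n m p ∧ pvRG (pvGood maps n m) p q := by
  simp [pvMUF, Finset.mem_filter]

-- a leader: the digit cell of minimal scan index in its component
def pvLead (maps : List String) (n m : Int) (c : Int × Int) : Prop :=
  pvGood maps n m c ∧ ∀ q, pvRG (pvGood maps n m) c q → pvIdx m c ≤ pvIdx m q

noncomputable def pvCompSum (maps : List String) (n m : Int) (c : Int × Int) : Int :=
  ∑ q ∈ pvClassF n m (pvGood maps n m) c, pvVal maps q

noncomputable def pvAnsSpec (maps : List String) (n m : Int) (u : List (Int × Int)) : List Int :=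
  (u.filter (fun c => @decide (pvLead maps n m c) (Classical.propDecidable _))).map
    (pvCompSum maps n m)

-- A's outer-loop body on a scan position
def pvStepOutA (maps : List String) (n m : Int) (st : List Int × List (List Int)) (p : Int × Int) :
    List Int × List (List Int) :=
  if PySem.Chars.isdigit (pvCellA maps p.1 p.2) = true ∧ pvVGet st.2 p.1 p.2 = 0 then
    let r := pvBfsA maps n m p.1 p.2 st.2
    (st.1 ++ [r.1], r.2)
  else st

def pvVisit0 (n m : Int) : List (List Int) :=
  List.replicate n.toNat (List.replicate m.toNat (0 : Int))

-- members of pvMUF are digit cells and pvMUF is closed under adjacency into digit cells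
lemma pvMUF_good {maps : List String} {n m : Int} {u : List (Int × Int)} {q : Int × Int}
    (h : q ∈ pvMUF maps n m u) : pvGood maps n m q := by
  obtain ⟨_, p, _, hp, hr⟩ := mem_pvMUF.mp h
  rcases pvRG_right hr with rfl | hq
  · exact hp
  · exact hq

lemma pvMUF_closed {maps : List String} {n m : Int} {u : List (Int × Int)} {p q : Int × Int}
    (h : p ∈ pvMUF maps n m u) (hq : pvGood maps n m q) (hadj : q ∈ pvNbrs p) :
    q ∈ pvMUF maps n m u := by
  obtain ⟨_, r, hru, hrg, hr⟩ := mem_pvMUF.mp h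
  exact mem_pvMUF.mpr ⟨pvGood_mem_grid hq, r, hru, hrg, Relation.ReflTransGen.tail hr ⟨hq, hadj⟩⟩

-- the BFS of A, started on a fresh digit cell over a component-closed visited set,
-- marks exactly the component of that cell and returns the component sum
lemma pvBfsA_comp {maps : List String} {n m : Int} {c : Int × Int} {visit : List (List Int)}
    (hs : pvShape n m visit)
    (hgoodM : ∀ q ∈ pvMA n m visit, pvGood maps n m q)
    (hclosed : ∀ p ∈ pvMA n m visit, ∀ q, pvGood maps n m q → q ∈ pvNbrs p → q ∈ pvMA n m visit)
    (hc : pvGood maps n m c) (hcnot : c ∉ pvMA n m visit) :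
    (pvBfsA maps n m c.1 c.2 visit).1 = pvCompSum maps n m c ∧
    pvShape n m (pvBfsA maps n m c.1 c.2 visit).2 ∧
    pvMA n m (pvBfsA maps n m c.1 c.2 visit).2 =
      pvMA n m visit ∪ pvClassF n m (pvGood maps n m) c := by
  have hcg : c ∈ pvGrid n m := pvGood_mem_grid hc
  have hM1A : pvMA n m (pvVSet visit c.1 c.2) = insert c (pvMA n m visit) := pvMA_vset hs hc
  have hs1 : pvShape n m (pvVSet visit c.1 c.2) := pvShape_vset hs
  have hq0 : ∀ p ∈ [(c.1, c.2)], p ∈ pvMA n m (pvVSet visit c.1 c.2) := by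
    intro p hp
    rw [List.mem_singleton] at hp
    subst hp
    rw [hM1A]
    exact Finset.mem_insert_self _ _
  have hcard : (pvMA n m (pvVSet visit c.1 c.2)).card ≤ (pvGrid n m).card :=
    Finset.card_le_card (pvMA_subset _)
  have hG : (pvGrid n m).card = n.toNat * m.toNat := pvGrid_card n m
  obtain ⟨hs2, hiff, hfood⟩ := pvBfsLoopA_spec maps n m (2 * (n.toNat * m.toNat) + 2)
    [(c.1, c.2)] (pvVSet visit c.1 c.2) (pvIntA (pvCellA maps c.1 c.2)) hs1 hq0
    (by simp only [List.length_singleton]; omega)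
  -- reachability = the component of c
  have hMreach : ∀ p q, p ∈ pvMA n m visit → pvRG (pvGood maps n m) p q → q ∈ pvMA n m visit := by
    intro p q hp h
    induction h with
    | refl => exact hp
    | tail _ h2 ih => exact hclosed _ ih _ h2.1 h2.2
  have hreach_sub : ∀ p, pvReach maps n m (· ∈ insert c (pvMA n m visit)) [(c.1, c.2)] p →
      p ∈ pvClassF n m (pvGood maps n m) c := by
    intro p h
    induction h with
    | base h =>
      rw [List.mem_singleton] at h
      subst h
      exact mem_pvClassF.mpr ⟨hcg, Relation.ReflTransGen.refl⟩
    | step _ hnb hg _ ih =>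
      exact mem_pvClassF.mpr ⟨pvGood_mem_grid hg,
        Relation.ReflTransGen.tail (mem_pvClassF.mp ih).2 ⟨hg, hnb⟩⟩
  have hclass_sub : ∀ q ∈ pvClassF n m (pvGood maps n m) c,
      q ∈ insert c (pvMA n m visit) ∨
        pvReach maps n m (· ∈ insert c (pvMA n m visit)) [(c.1, c.2)] q := by
    intro q hq
    obtain ⟨hqg, hr⟩ := mem_pvClassF.mp hq
    clear hqg hq
    induction hr with
    | refl => exact Or.inl (Finset.mem_insert_self _ _)
    | @tail b q h1 h2 ih =>
      by_cases hqM : q ∈ insert c (pvMA n m visit)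
      · exact Or.inl hqM
      · rcases ih with hb | hb
        · rcases Finset.mem_insert.mp hb with rfl | hbM
          · exact Or.inr (pvReach.step (pvReach.base (List.mem_singleton.mpr rfl)) h2.2 h2.1 hqM)
          · exact absurd (hclosed _ hbM _ h2.1 h2.2) (fun h => hqM (Finset.mem_insert_of_mem h))
        · exact Or.inr (pvReach.step hb h2.2 h2.1 hqM)
  have hdisj : Disjoint (pvMA n m visit) (pvClassF n m (pvGood maps n m) c) := by
    rw [Finset.disjoint_right]
    intro q hq hqM
    obtain ⟨_, hr⟩ := mem_pvClassF.mp hq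
    exact hcnot (hMreach q c hqM (pvRG_symm hc hr))
  have hcmem : c ∈ pvClassF n m (pvGood maps n m) c :=
    mem_pvClassF.mpr ⟨hcg, Relation.ReflTransGen.refl⟩
  have hMfin : pvMA n m (pvBfsA maps n m c.1 c.2 visit).2 =
      pvMA n m visit ∪ pvClassF n m (pvGood maps n m) c := by
    apply Finset.ext
    intro p
    rw [Finset.mem_union]
    show p ∈ pvMA n m (pvBfsLoopA maps n m (2 * (n.toNat * m.toNat) + 2) [(c.1, c.2)]
      (pvVSet visit c.1 c.2) (pvIntA (pvCellA maps c.1 c.2))).2 ↔ _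
    rw [hiff p, hM1A]
    constructor
    · rintro (hp | hp)
      · rcases Finset.mem_insert.mp hp with rfl | hp
        · exact Or.inr hcmem
        · exact Or.inl hp
      · exact Or.inr (hreach_sub p hp)
    · rintro (hp | hp)
      · exact Or.inl (Finset.mem_insert_of_mem hp)
      · rcases hclass_sub p hp with h | h
        · exact Or.inl h
        · exact Or.inr h
  refine ⟨?_, hs2, hMfin⟩
  show (pvBfsLoopA maps n m (2 * (n.toNat * m.toNat) + 2) [(c.1, c.2)]
      (pvVSet visit c.1 c.2) (pvIntA (pvCellA maps c.1 c.2))).1 = _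
  rw [hfood]
  have h1 : pvMA n m (pvBfsLoopA maps n m (2 * (n.toNat * m.toNat) + 2) [(c.1, c.2)]
      (pvVSet visit c.1 c.2) (pvIntA (pvCellA maps c.1 c.2))).2 =
      pvMA n m visit ∪ pvClassF n m (pvGood maps n m) c := hMfin
  rw [h1, hM1A, Finset.sum_union hdisj, Finset.sum_insert hcnot]
  have hv : pvIntA (pvCellA maps c.1 c.2) = pvVal maps c := rfl
  rw [hv]
  unfold pvCompSum
  ring

-- the A scan invariant
lemma pvAScan (maps : List String) (n m : Int) :
    ∀ (u rest : List (Int × Int)), pvPairs n m = u ++ rest →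
    pvShape n m (u.foldl (pvStepOutA maps n m) (([] : List Int), pvVisit0 n m)).2 ∧
    pvMA n m (u.foldl (pvStepOutA maps n m) (([] : List Int), pvVisit0 n m)).2 = pvMUF maps n m u ∧
    (u.foldl (pvStepOutA maps n m) (([] : List Int), pvVisit0 n m)).1 = pvAnsSpec maps n m u := by
  intro u
  induction u using List.reverseRecOn with
  | nil =>
    intro rest h
    simp only [List.foldl_nil]
    refine ⟨pvShape_replicate n m, ?_, ?_⟩
    · rw [show pvVisit0 n m = List.replicate n.toNat (List.replicate m.toNat (0 : Int)) from rfl,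
        pvMA_replicate]
      apply Finset.ext
      intro q
      simp [mem_pvMUF]
    · simp [pvAnsSpec]
  | append_singleton u c ih =>
    intro rest h
    rw [List.append_assoc] at h
    obtain ⟨hsh, hMA, hans⟩ := ih (c :: rest) h
    obtain ⟨hcg, hu, hfull, hcnotu⟩ := pvPrefix_facts h
    obtain ⟨hb1, hb2, hb3, hb4⟩ := mem_pvGrid.mp hcg
    rw [List.foldl_append, List.foldl_cons, List.foldl_nil]
    set st := u.foldl (pvStepOutA maps n m) (([] : List Int), pvVisit0 n m) with hst
    by_cases hguard : PySem.Chars.isdigit (pvCellA maps c.1 c.2) = true ∧ pvVGet st.2 c.1 c.2 = 0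
    · have hgood : pvGood maps n m c := ⟨hb1, hb2, hb3, hb4, hguard.1⟩
      have hcnotM : c ∉ pvMA n m st.2 := by
        rw [mem_pvMA]
        rintro ⟨_, hne⟩
        exact hne hguard.2
      have hstep : pvStepOutA maps n m st c =
          (st.1 ++ [(pvBfsA maps n m c.1 c.2 st.2).1], (pvBfsA maps n m c.1 c.2 st.2).2) := by
        unfold pvStepOutA
        rw [if_pos hguard]
      rw [hstep]
      obtain ⟨hfood, hsh', hMA'⟩ := pvBfsA_comp hsh
        (fun q hq => pvMUF_good (hMA ▸ hq))
        (fun p hp q hqg hadj => hMA ▸ pvMUF_closed (hMA ▸ hp) hqg hadj)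
        hgood hcnotM
      have hlead : pvLead maps n m c := by
        refine ⟨hgood, fun q hq => ?_⟩
        by_contra hlt
        push_neg at hlt
        have hqgood : pvGood maps n m q := by
          rcases pvRG_right hq with rfl | hg
          · omega
          · exact hg
        have hqu : q ∈ u := hfull q (pvGood_mem_grid hqgood) (by omega)
        have : c ∈ pvMUF maps n m u :=
          mem_pvMUF.mpr ⟨hcg, q, hqu, hqgood, pvRG_symm hgood hq⟩
        exact hcnotM (by rw [hMA]; exact this)
      have hansSpec : pvAnsSpec maps n m (u ++ [c]) = pvAnsSpec maps n m u ++ [pvCompSum maps n m c] := by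
        unfold pvAnsSpec
        rw [List.filter_append, List.map_append]
        have hd : (@decide (pvLead maps n m c) (Classical.propDecidable _)) = true :=
          @decide_eq_true _ (Classical.propDecidable _) hlead
        simp [List.filter_singleton, hd]
      have hMUF' : pvMUF maps n m (u ++ [c]) = pvMUF maps n m u ∪ pvClassF n m (pvGood maps n m) c := by
        apply Finset.ext
        intro q
        rw [Finset.mem_union, mem_pvMUF, mem_pvMUF, mem_pvClassF]
        constructor
        · rintro ⟨hqg, p, hp, hpg, hr⟩
          rcases List.mem_append.mp hp with hp | hp
          · exact Or.inl ⟨hqg, p, hp, hpg, hr⟩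
          · rw [List.mem_singleton] at hp
            subst hp
            exact Or.inr ⟨hqg, hr⟩
        · rintro (⟨hqg, p, hp, hpg, hr⟩ | ⟨hqg, hr⟩)
          · exact ⟨hqg, p, List.mem_append.mpr (Or.inl hp), hpg, hr⟩
          · exact ⟨hqg, c, List.mem_append.mpr (Or.inr (List.mem_singleton_self c)), hgood, hr⟩
      refine ⟨hsh', ?_, ?_⟩
      · rw [hMA', hMA, hMUF']
      · rw [hfood, hans, hansSpec]
    · have hstep : pvStepOutA maps n m st c = st := by
        unfold pvStepOutA
        rw [if_neg hguard]
      rw [hstep]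
      have hnotlead : ¬ pvLead maps n m c := by
        intro hld
        have hgood := hld.1
        have hcM : c ∈ pvMA n m st.2 := by
          by_contra hcM
          apply hguard
          refine ⟨hgood.2.2.2.2, ?_⟩
          by_contra hne
          exact hcM (mem_pvMA.mpr ⟨hcg, hne⟩)
        rw [hMA] at hcM
        obtain ⟨_, p, hpu, hpg, hr⟩ := mem_pvMUF.mp hcM
        have := hld.2 p (pvRG_symm hpg hr)
        have := (hu p hpu).2
        omega
      have hMUF' : pvMUF maps n m (u ++ [c]) = pvMUF maps n m u := by
        apply Finset.ext
        intro q
        rw [mem_pvMUF, mem_pvMUF]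
        constructor
        · rintro ⟨hqg, p, hp, hpg, hr⟩
          rcases List.mem_append.mp hp with hp | hp
          · exact ⟨hqg, p, hp, hpg, hr⟩
          · rw [List.mem_singleton] at hp
            rw [hp] at hpg hr
            -- c is a digit cell already belonging to a scanned component (else it would lead)
            have hcM : c ∈ pvMA n m st.2 := by
              by_contra hcM
              apply hnotlead
              refine ⟨hpg, fun q' hq' => ?_⟩
              by_contra hlt
              push_neg at hlt
              have hq'good : pvGood maps n m q' := by
                rcases pvRG_right hq' with rfl | hg
                · omega
                · exact hg
              have hq'u : q' ∈ u := hfull q' (pvGood_mem_grid hq'good) (by omega)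
              exact hcM (by
                rw [hMA]
                exact mem_pvMUF.mpr ⟨hcg, q', hq'u, hq'good, pvRG_symm hpg hq'⟩)
            rw [hMA] at hcM
            obtain ⟨_, p0, hp0u, hp0g, hr0⟩ := mem_pvMUF.mp hcM
            exact ⟨hqg, p0, hp0u, hp0g, Relation.ReflTransGen.trans hr0 hr⟩
        · rintro ⟨hqg, p, hp, hpg, hr⟩
          exact ⟨hqg, p, List.mem_append.mpr (Or.inl hp), hpg, hr⟩
      have hansSpec : pvAnsSpec maps n m (u ++ [c]) = pvAnsSpec maps n m u := by
        unfold pvAnsSpec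
        rw [List.filter_append, List.map_append]
        have hd : (@decide (pvLead maps n m c) (Classical.propDecidable _)) = false :=
          @decide_eq_false _ (Classical.propDecidable _) hnotlead
        simp [List.filter_singleton, hd]
      refine ⟨hsh, ?_, ?_⟩
      · rw [hMA, hMUF']
      · rw [hans, hansSpec]

-- ---------- what B computes, abstractly ----------

-- the allowed set after scanning the prefix u
def pvGS (maps : List String) (n m : Int) (u : List (Int × Int)) (b : Int × Int) : Prop :=
  pvGood maps n m b ∧ b ∈ u

-- B's outer-loop body on a scan position
def pvStepOutB (maps : List String) (m : Int) (d : PySem.Dict (Int × Int) Int) (p : Int × Int) :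
    PySem.Dict (Int × Int) Int :=
  pvCellStepB maps m d p.1 p.2

-- one union step of the quick-find scan: what the labels become when cell c joins
lemma pvBMerge (maps : List String) (n m : Int) (u : List (Int × Int)) (c : Int × Int)
    (hgc : pvGood maps n m c)
    (hu : ∀ p ∈ u, p ∈ pvGrid n m ∧ pvIdx m p < pvIdx m c)
    (nbs : List (Int × Int))
    (hnbs_mem : ∀ nb ∈ nbs, pvGS maps n m u nb ∧ nb ∈ pvNbrs c)
    (hnbs_all : ∀ b, pvGS maps n m u b → b ∈ pvNbrs c → b ∈ nbs)
    (keep : Int)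
    (hkeep_mem : keep ∈ nbs.map (pvLab n m (pvGS maps n m u)))
    (hkeep_lb : ∀ x ∈ nbs.map (pvLab n m (pvGS maps n m u)), keep ≤ x) :
    pvLab n m (pvGS maps n m (u ++ [c])) c = keep ∧
    ∀ p, pvGS maps n m u p →
      pvLab n m (pvGS maps n m (u ++ [c])) p =
        (if pvLab n m (pvGS maps n m u) p ≠ keep ∧
            pvLab n m (pvGS maps n m u) p ∈ nbs.map (pvLab n m (pvGS maps n m u))
         then keep else pvLab n m (pvGS maps n m u) p) := by
  have hcg : c ∈ pvGrid n m := pvGood_mem_grid hgc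
  have hTiff : ∀ b, pvGS maps n m (u ++ [c]) b ↔ (pvGS maps n m u b ∨ b = c) := by
    intro b
    constructor
    · rintro ⟨hg, hb⟩
      rcases List.mem_append.mp hb with hb | hb
      · exact Or.inl ⟨hg, hb⟩
      · exact Or.inr (List.mem_singleton.mp hb)
    · rintro (⟨hg, hb⟩ | hbc)
      · exact ⟨hg, List.mem_append.mpr (Or.inl hb)⟩
      · rw [hbc]
        exact ⟨hgc, List.mem_append.mpr (Or.inr (List.mem_singleton_self c))⟩
  have hScnot : ¬ pvGS maps n m u c := by
    rintro ⟨_, hc⟩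
    have := (hu c hc).2
    omega
  obtain ⟨nb0, hnb0m, hnb0keep⟩ := List.mem_map.mp hkeep_mem
  have hnb0S : pvGS maps n m u nb0 := (hnbs_mem nb0 hnb0m).1
  have hnb0g : nb0 ∈ pvGrid n m := pvGood_mem_grid hnb0S.1
  obtain ⟨⟨r0, hr0, hr0v⟩, _⟩ := pvLab_spec (S := pvGS maps n m u) hnb0g
  have hr0u : r0 ∈ u := by
    rcases pvRG_right (mem_pvClassF.mp hr0).2 with rfl | hS
    · exact hnb0S.2
    · exact hS.2
  have hkeep_lt_c : keep < pvIdx m c := by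
    have h1 := (hu r0 hr0u).2
    omega
  have hcore : ∀ p, pvCpred (pvGS maps n m u) c p →
      pvLab n m (fun b => pvGS maps n m u b ∨ b = c) p = keep := by
    intro p hCp
    have hTcp : pvRG (fun b => pvGS maps n m u b ∨ b = c) c p := pvMerge_reach_c.mpr hCp
    have hTpc : pvRG (fun b => pvGS maps n m u b ∨ b = c) p c := pvRG_symm (Or.inr rfl) hTcp
    have hTcr : pvRG (fun b => pvGS maps n m u b ∨ b = c) c r0 := by
      refine Relation.ReflTransGen.head ⟨Or.inl hnb0S, (hnbs_mem nb0 hnb0m).2⟩ ?_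
      exact pvRG_mono (fun b hb => Or.inl hb) (mem_pvClassF.mp hr0).2
    apply pvLab_eq_of
    · refine ⟨r0, mem_pvClassF.mpr ⟨(mem_pvClassF.mp hr0).1, Relation.ReflTransGen.trans hTpc hTcr⟩, ?_⟩
      rw [hr0v, hnb0keep]
    · intro q hq
      obtain ⟨hqg, hTq⟩ := mem_pvClassF.mp hq
      have hCq : pvCpred (pvGS maps n m u) c q := (pvMerge_inC hCp q).mp hTq
      rcases hCq with rfl | ⟨nb, hnbS, hnbadj, hnbq⟩
      · omega
      · have hnbnbs : nb ∈ nbs := hnbs_all nb hnbS hnbadj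
        have h1 : pvLab n m (pvGS maps n m u) nb ≤ pvIdx m q :=
          (pvLab_spec (pvGood_mem_grid hnbS.1)).2 q (mem_pvClassF.mpr ⟨hqg, hnbq⟩)
        have h2 : keep ≤ pvLab n m (pvGS maps n m u) nb :=
          hkeep_lb _ (List.mem_map_of_mem hnbnbs)
        omega
  constructor
  · rw [pvLab_congr hcg (fun q => pvRG_congr hTiff)]
    exact hcore c (Or.inl rfl)
  · intro p hSp
    have hpg : p ∈ pvGrid n m := pvGood_mem_grid hSp.1
    rw [pvLab_congr hpg (fun q => pvRG_congr hTiff)]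
    by_cases hCp : pvCpred (pvGS maps n m u) c p
    · rw [hcore p hCp]
      rcases hCp with rfl | ⟨nb, hnbS, hnbadj, hnbp⟩
      · exact absurd hSp hScnot
      · have hlabp : pvLab n m (pvGS maps n m u) p = pvLab n m (pvGS maps n m u) nb :=
          (pvLab_eq_of_R hnbS hSp hpg hnbp).symm
        by_cases hk : pvLab n m (pvGS maps n m u) p = keep
        · rw [if_neg (by tauto)]
          exact hk.symm
        · rw [if_pos ⟨hk, by
            rw [hlabp]
            exact List.mem_map_of_mem (hnbs_all nb hnbS hnbadj)⟩]
    · rw [pvLab_congr hpg (fun q => pvMerge_unreach hSp hCp q)]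
      have hnotmem : ¬ (pvLab n m (pvGS maps n m u) p ≠ keep ∧
          pvLab n m (pvGS maps n m u) p ∈ nbs.map (pvLab n m (pvGS maps n m u))) := by
        rintro ⟨_, hmem⟩
        obtain ⟨nb, hnbm, heq⟩ := List.mem_map.mp hmem
        have hnbS := (hnbs_mem nb hnbm).1
        have hr : pvRG (pvGS maps n m u) nb p :=
          pvLab_inj hnbS hSp (pvGood_mem_grid hnbS.1) hpg heq
        exact hCp (Or.inr ⟨nb, hnbS, (hnbs_mem nb hnbm).2, hr⟩)
      rw [if_neg hnotmem]

lemma pvMinD_one (a : Int) : PySem.List.minD [a] (fun x => x) 0 = a := rfl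

lemma pvMinD_two (a b : Int) :
    PySem.List.minD [a, b] (fun x => x) 0 = if b < a then b else a := by
  by_cases h : b < a <;> simp [PySem.List.minD, PySem.List.min?, h]

lemma pvRewriteFold (keep : Int) : ∀ (os : List Int) (d : PySem.Dict (Int × Int) Int),
    (os.foldl (fun d other => if other ≠ keep then pvRewriteB d keep other else d) d).items =
      d.items.map (fun pr => (pr.1, if pr.2 ≠ keep ∧ pr.2 ∈ os then keep else pr.2)) := by
  intro os
  induction os with
  | nil =>
    intro d
    simp
  | cons o os ih =>
    intro d
    rw [List.foldl_cons]
    by_cases ho : o ≠ keep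
    · rw [if_pos ho, ih, pvRewriteB]
      show (d.items.map _).map _ = _
      rw [List.map_map]
      apply List.map_congr_left
      intro pr _
      simp only [Function.comp]
      by_cases h1 : pr.2 = o
      · have h2 : pr.2 ≠ keep := by rw [h1]; exact ho
        simp [h1, h2, ho]
      · by_cases h2 : pr.2 = keep
        · simp [h1, h2]
        · by_cases h3 : pr.2 ∈ os
          · simp [h1, h2, h3]
          · have : ¬ (pr.2 = o ∨ pr.2 ∈ os) := by tauto
            simp [h1, h2, h3]
    · rw [if_neg ho, ih]
      apply List.map_congr_left
      intro pr _
      have ho' : o = keep := by tauto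
      subst ho'
      by_cases h2 : pr.2 = o
      · simp [h2]
      · simp [h2]

-- a digit cell with no labeled neighbour starts a fresh class
lemma pvBFresh (maps : List String) (n m : Int) (u : List (Int × Int)) (c : Int × Int)
    (hgc : pvGood maps n m c)
    (hu : ∀ p ∈ u, p ∈ pvGrid n m ∧ pvIdx m p < pvIdx m c)
    (hnone : ∀ b, pvGS maps n m u b → b ∈ pvNbrs c → False) :
    pvLab n m (pvGS maps n m (u ++ [c])) c = pvIdx m c ∧
    ∀ p, pvGS maps n m u p →
      pvLab n m (pvGS maps n m (u ++ [c])) p = pvLab n m (pvGS maps n m u) p := by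
  have hcg : c ∈ pvGrid n m := pvGood_mem_grid hgc
  have hTiff : ∀ b, pvGS maps n m (u ++ [c]) b ↔ (pvGS maps n m u b ∨ b = c) := by
    intro b
    constructor
    · rintro ⟨hg, hb⟩
      rcases List.mem_append.mp hb with hb | hb
      · exact Or.inl ⟨hg, hb⟩
      · exact Or.inr (List.mem_singleton.mp hb)
    · rintro (⟨hg, hb⟩ | hbc)
      · exact ⟨hg, List.mem_append.mpr (Or.inl hb)⟩
      · rw [hbc]
        exact ⟨hgc, List.mem_append.mpr (Or.inr (List.mem_singleton_self c))⟩
  have hScnot : ¬ pvGS maps n m u c := by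
    rintro ⟨_, hc⟩
    have := (hu c hc).2
    omega
  constructor
  · rw [pvLab_congr hcg (fun q => pvRG_congr hTiff)]
    apply pvLab_eq_of
    · exact ⟨c, mem_pvClassF.mpr ⟨hcg, Relation.ReflTransGen.refl⟩, rfl⟩
    · intro q hq
      obtain ⟨hqg, hTq⟩ := mem_pvClassF.mp hq
      rcases pvMerge_reach_c.mp hTq with rfl | ⟨nb, hnbS, hnbadj, _⟩
      · omega
      · exact absurd hnbadj (fun ha => hnone nb hnbS ha)
  · intro p hSp
    have hpg : p ∈ pvGrid n m := pvGood_mem_grid hSp.1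
    rw [pvLab_congr hpg (fun q => pvRG_congr hTiff)]
    have hCp : ¬ pvCpred (pvGS maps n m u) c p := by
      rintro (rfl | ⟨nb, hnbS, hnbadj, _⟩)
      · exact hScnot hSp
      · exact hnone nb hnbS hnbadj
    exact pvLab_congr hpg (fun q => pvMerge_unreach hSp hCp q)

-- the B scan invariant: the label dict holds every scanned digit cell, in scan order,
-- labeled with the minimal scan index of its component inside the scanned prefix
lemma pvBScan (maps : List String) (n m : Int) :
    ∀ (u rest : List (Int × Int)), pvPairs n m = u ++ rest →
    (u.foldl (pvStepOutB maps m) PySem.Dict.empty).items =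
      (u.filter (pvGoodB maps n m)).map (fun p => (p, pvLab n m (pvGS maps n m u) p)) := by
  intro u
  induction u using List.reverseRecOn with
  | nil =>
    intro rest h
    simp only [List.foldl_nil, List.filter_nil, List.map_nil]
    rfl
  | append_singleton u c ih =>
    intro rest h
    rw [List.append_assoc] at h
    have hitems := ih (c :: rest) h
    obtain ⟨hcg, hu, hfull, hcnotu⟩ := pvPrefix_facts h
    obtain ⟨hb1, hb2, hb3, hb4⟩ := mem_pvGrid.mp hcg
    have hund : u.Nodup := by
      have hnd := pvPairs_nodup n m
      rw [h] at hnd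
      exact hnd.of_append_left
    rw [List.foldl_append, List.foldl_cons, List.foldl_nil]
    set labels := u.foldl (pvStepOutB maps m) PySem.Dict.empty with hlabels
    have hkeys : labels.keys = u.filter (pvGoodB maps n m) := by
      show labels.items.map Prod.fst = _
      rw [hitems, List.map_map]
      exact List.map_id'' (fun p => rfl) _
    have hknd : labels.keys.Nodup := by
      rw [hkeys]
      exact hund.filter _
    have hcontains : ∀ b : Int × Int, labels.contains b = true ↔ (pvGood maps n m b ∧ b ∈ u) := by
      intro b
      rw [PySem.Dict.contains_iff_mem_keys, hkeys, List.mem_filter, pvGoodB_iff, and_comm]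
    have hgetD : ∀ b : Int × Int, pvGood maps n m b → b ∈ u →
        labels.getD b 0 = pvLab n m (pvGS maps n m u) b := by
      intro b hbg hbu
      refine PySem.Dict.getD_of_mem_items labels ?_ hknd 0
      rw [hitems]
      exact List.mem_map.mpr ⟨b, List.mem_filter.mpr ⟨hbu, pvGoodB_iff.mpr hbg⟩, rfl⟩
    have hcfalse : labels.contains (c.1, c.2) = true → False := by
      intro hc
      exact hcnotu ((hcontains (c.1, c.2)).mp hc).2
    have hcfalse' : labels.contains (c.1, c.2) = false :=
      Bool.eq_false_iff.mpr (fun hc => hcfalse hc)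
    by_cases hgoodc : pvGood maps n m c
    · -- c是 digit cell: the scan unions it with its labeled left/up neighbours
      have hm : 0 < m := by omega
      have hdig : PySem.Chars.isdigit (pvCellA maps c.1 c.2) = true := hgoodc.2.2.2.2
      have hidxL : pvIdx m (c.1, c.2 - 1) < pvIdx m c := by
        show c.1 * m + (c.2 - 1) < c.1 * m + c.2
        omega
      have hidxU : pvIdx m (c.1 - 1, c.2) < pvIdx m c := by
        show (c.1 - 1) * m + c.2 < c.1 * m + c.2
        have : (c.1 - 1) * m = c.1 * m - m := by ring
        omega
      have hmemL : pvGood maps n m (c.1, c.2 - 1) → (c.1, c.2 - 1) ∈ u :=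
        fun hg => hfull _ (pvGood_mem_grid hg) hidxL
      have hmemU : pvGood maps n m (c.1 - 1, c.2) → (c.1 - 1, c.2) ∈ u :=
        fun hg => hfull _ (pvGood_mem_grid hg) hidxU
      have hnbr_cases : ∀ b, pvGS maps n m u b → b ∈ pvNbrs c →
          b = (c.1, c.2 - 1) ∨ b = (c.1 - 1, c.2) := by
        rintro b ⟨hbg, hbu⟩ hadj
        have hlt := (hu b hbu).2
        simp only [pvNbrs, List.mem_cons, List.not_mem_nil, or_false] at hadj
        rcases hadj with rfl | rfl | rfl | rfl
        · exfalso
          have h1 : pvIdx m (c.1 + 1, c.2) = c.1 * m + m + c.2 := by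
            show (c.1 + 1) * m + c.2 = _
            ring
          have h2 : pvIdx m c = c.1 * m + c.2 := rfl
          omega
        · exact Or.inr rfl
        · exfalso
          have h1 : pvIdx m (c.1, c.2 + 1) = c.1 * m + (c.2 + 1) := rfl
          have h2 : pvIdx m c = c.1 * m + c.2 := rfl
          omega
        · exact Or.inl rfl
      have hadjL : (c.1, c.2 - 1) ∈ pvNbrs c := by simp [pvNbrs]
      have hadjU : (c.1 - 1, c.2) ∈ pvNbrs c := by simp [pvNbrs]
      have hgfilter : (u ++ [c]).filter (pvGoodB maps n m) =
          u.filter (pvGoodB maps n m) ++ [c] := by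
        rw [List.filter_append]
        congr 1
        simp [List.filter_singleton, pvGoodB_iff.mpr hgoodc]
      rw [hgfilter]
      -- the shared shape of the three 'some neighbour is labeled' cases
      have hmerge : ∀ (nbs : List (Int × Int)),
          (∀ nb ∈ nbs, pvGS maps n m u nb ∧ nb ∈ pvNbrs c) →
          (∀ b, pvGS maps n m u b → b ∈ pvNbrs c → b ∈ nbs) →
          ∀ keep : Int, keep ∈ nbs.map (pvLab n m (pvGS maps n m u)) →
          (∀ x ∈ nbs.map (pvLab n m (pvGS maps n m u)), keep ≤ x) →
          ((nbs.map (pvLab n m (pvGS maps n m u))).foldl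
              (fun d other => if other ≠ keep then pvRewriteB d keep other else d)
              (labels.insert (c.1, c.2) keep)).items =
            (u.filter (pvGoodB maps n m) ++ [c]).map
              (fun p => (p, pvLab n m (pvGS maps n m (u ++ [c])) p)) := by
        intro nbs hnbs_mem hnbs_all keep hkm hklb
        obtain ⟨hk1, hk2⟩ := pvBMerge maps n m u c hgoodc hu nbs hnbs_mem hnbs_all keep hkm hklb
        rw [pvRewriteFold, PySem.Dict.items_insert_of_not_contains _ _ hcfalse', hitems,
          List.map_append, List.map_append, List.map_map]
        congr 1
        · apply List.map_congr_left
          intro p hp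
          obtain ⟨hpu, hpb⟩ := List.mem_filter.mp hp
          have hSp : pvGS maps n m u p := ⟨pvGoodB_iff.mp hpb, hpu⟩
          simp only [Function.comp]
          rw [hk2 p hSp]
        · simp only [List.map_cons, List.map_nil]
          have : ¬ (keep ≠ keep ∧ keep ∈ nbs.map (pvLab n m (pvGS maps n m u))) := by tauto
          rw [if_neg this, hk1]
      by_cases hgl : pvGood maps n m (c.1, c.2 - 1) <;>
        by_cases hgu : pvGood maps n m (c.1 - 1, c.2)
      · -- both neighbours labeled
        have hclb : labels.contains (c.1, c.2 - 1) = true := (hcontains _).mpr ⟨hgl, hmemL hgl⟩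
        have hcub : labels.contains (c.1 - 1, c.2) = true := (hcontains _).mpr ⟨hgu, hmemU hgu⟩
        have hstep : pvStepOutB maps m labels c =
            ([labels.getD (c.1, c.2 - 1) 0, labels.getD (c.1 - 1, c.2) 0].foldl
              (fun d other =>
                if other ≠ PySem.List.minD [labels.getD (c.1, c.2 - 1) 0, labels.getD (c.1 - 1, c.2) 0] (fun x => x) 0
                then pvRewriteB d (PySem.List.minD [labels.getD (c.1, c.2 - 1) 0, labels.getD (c.1 - 1, c.2) 0] (fun x => x) 0) other
                else d)
              (labels.insert (c.1, c.2)
                (PySem.List.minD [labels.getD (c.1, c.2 - 1) 0, labels.getD (c.1 - 1, c.2) 0] (fun x => x) 0))) := by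
          unfold pvStepOutB pvCellStepB
          simp [hdig, hclb, hcub]
        rw [hstep, hgetD _ hgl (hmemL hgl), hgetD _ hgu (hmemU hgu), pvMinD_two]
        have hmap : [pvLab n m (pvGS maps n m u) (c.1, c.2 - 1), pvLab n m (pvGS maps n m u) (c.1 - 1, c.2)] =
            [(c.1, c.2 - 1), (c.1 - 1, c.2)].map (pvLab n m (pvGS maps n m u)) := rfl
        rw [hmap]
        apply hmerge
        · rintro nb hnb
          rcases List.mem_cons.mp hnb with rfl | hnb
          · exact ⟨⟨hgl, hmemL hgl⟩, hadjL⟩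
          · rw [List.mem_singleton.mp hnb]
            exact ⟨⟨hgu, hmemU hgu⟩, hadjU⟩
        · intro b hSb hadj
          rcases hnbr_cases b hSb hadj with rfl | rfl
          · exact List.mem_cons_self
          · exact List.mem_cons_of_mem _ (List.mem_singleton_self _)
        · simp only [List.map_cons, List.map_nil]
          split_ifs <;> simp
        · intro x hx
          simp only [List.map_cons, List.map_nil, List.mem_cons, List.not_mem_nil, or_false] at hx
          rcases hx with rfl | rfl <;> (split_ifs with hlt <;> omega)
      · -- only the left neighbour is labeled
        have hclb : labels.contains (c.1, c.2 - 1) = true := (hcontains _).mpr ⟨hgl, hmemL hgl⟩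
        have hcub : labels.contains (c.1 - 1, c.2) = false :=
          Bool.eq_false_iff.mpr (fun hb => hgu ((hcontains _).mp hb).1)
        have hstep : pvStepOutB maps m labels c =
            ([labels.getD (c.1, c.2 - 1) 0].foldl
              (fun d other =>
                if other ≠ PySem.List.minD [labels.getD (c.1, c.2 - 1) 0] (fun x => x) 0
                then pvRewriteB d (PySem.List.minD [labels.getD (c.1, c.2 - 1) 0] (fun x => x) 0) other
                else d)
              (labels.insert (c.1, c.2)
                (PySem.List.minD [labels.getD (c.1, c.2 - 1) 0] (fun x => x) 0))) := by
          unfold pvStepOutB pvCellStepB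
          simp [hdig, hclb, hcub]
        rw [hstep, hgetD _ hgl (hmemL hgl), pvMinD_one]
        have hmap : [pvLab n m (pvGS maps n m u) (c.1, c.2 - 1)] =
            [(c.1, c.2 - 1)].map (pvLab n m (pvGS maps n m u)) := rfl
        rw [hmap]
        apply hmerge
        · rintro nb hnb
          rw [List.mem_singleton.mp hnb]
          exact ⟨⟨hgl, hmemL hgl⟩, hadjL⟩
        · intro b hSb hadj
          rcases hnbr_cases b hSb hadj with rfl | rfl
          · exact List.mem_singleton_self _
          · exact absurd hSb.1 hgu
        · simp
        · intro x hx
          simp only [List.map_cons, List.map_nil, List.mem_cons, List.not_mem_nil, or_false] at hx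
          omega
      · -- only the upper neighbour is labeled
        have hclb : labels.contains (c.1, c.2 - 1) = false :=
          Bool.eq_false_iff.mpr (fun hb => hgl ((hcontains _).mp hb).1)
        have hcub : labels.contains (c.1 - 1, c.2) = true := (hcontains _).mpr ⟨hgu, hmemU hgu⟩
        have hstep : pvStepOutB maps m labels c =
            ([labels.getD (c.1 - 1, c.2) 0].foldl
              (fun d other =>
                if other ≠ PySem.List.minD [labels.getD (c.1 - 1, c.2) 0] (fun x => x) 0
                then pvRewriteB d (PySem.List.minD [labels.getD (c.1 - 1, c.2) 0] (fun x => x) 0) other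
                else d)
              (labels.insert (c.1, c.2)
                (PySem.List.minD [labels.getD (c.1 - 1, c.2) 0] (fun x => x) 0))) := by
          unfold pvStepOutB pvCellStepB
          simp [hdig, hclb, hcub]
        rw [hstep, hgetD _ hgu (hmemU hgu), pvMinD_one]
        have hmap : [pvLab n m (pvGS maps n m u) (c.1 - 1, c.2)] =
            [(c.1 - 1, c.2)].map (pvLab n m (pvGS maps n m u)) := rfl
        rw [hmap]
        apply hmerge
        · rintro nb hnb
          rw [List.mem_singleton.mp hnb]
          exact ⟨⟨hgu, hmemU hgu⟩, hadjU⟩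
        · intro b hSb hadj
          rcases hnbr_cases b hSb hadj with rfl | rfl
          · exact absurd hSb.1 hgl
          · exact List.mem_singleton_self _
        · simp
        · intro x hx
          simp only [List.map_cons, List.map_nil, List.mem_cons, List.not_mem_nil, or_false] at hx
          omega
      · -- no labeled neighbour: a fresh class
        have hclb : labels.contains (c.1, c.2 - 1) = false :=
          Bool.eq_false_iff.mpr (fun hb => hgl ((hcontains _).mp hb).1)
        have hcub : labels.contains (c.1 - 1, c.2) = false :=
          Bool.eq_false_iff.mpr (fun hb => hgu ((hcontains _).mp hb).1)
        have hstep : pvStepOutB maps m labels c =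
            labels.insert (c.1, c.2) (c.1 * m + c.2) := by
          unfold pvStepOutB pvCellStepB
          simp [hdig, hclb, hcub]
        obtain ⟨hf1, hf2⟩ := pvBFresh maps n m u c hgoodc hu (by
          intro b hSb hadj
          rcases hnbr_cases b hSb hadj with rfl | rfl
          · exact hgl hSb.1
          · exact hgu hSb.1)
        rw [hstep, PySem.Dict.items_insert_of_not_contains _ _ hcfalse', hitems, List.map_append]
        congr 1
        · apply List.map_congr_left
          intro p hp
          obtain ⟨hpu, hpb⟩ := List.mem_filter.mp hp
          rw [hf2 p ⟨pvGoodB_iff.mp hpb, hpu⟩]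
        · simp only [List.map_cons, List.map_nil]
          rw [hf1]
          rfl
    · -- not a digit cell: nothing happens and the allowed set is unchanged
      have hdig : PySem.Chars.isdigit (pvCellA maps c.1 c.2) = false := by
        by_contra hne
        have : PySem.Chars.isdigit (pvCellA maps c.1 c.2) = true := by
          revert hne
          cases PySem.Chars.isdigit (pvCellA maps c.1 c.2) <;> simp
        exact hgoodc ⟨hb1, hb2, hb3, hb4, this⟩
      have hstep : pvStepOutB maps m labels c = labels := by
        unfold pvStepOutB pvCellStepB
        rw [hdig]
        simp
      rw [hstep, hitems]
      have hgfilter : (u ++ [c]).filter (pvGoodB maps n m) = u.filter (pvGoodB maps n m) := by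
        rw [List.filter_append]
        have : pvGoodB maps n m c = false := by
          rw [Bool.eq_false_iff]
          intro hb
          exact hgoodc (pvGoodB_iff.mp hb)
        simp [List.filter_singleton, this]
      rw [hgfilter]
      apply List.map_congr_left
      intro p hp
      obtain ⟨hpu, hpb⟩ := List.mem_filter.mp hp
      have hpg : pvGood maps n m p := pvGoodB_iff.mp hpb
      have hSiff : ∀ b, pvGS maps n m u b ↔ pvGS maps n m (u ++ [c]) b := by
        intro b
        unfold pvGS
        constructor
        · rintro ⟨hg, hb⟩
          exact ⟨hg, List.mem_append.mpr (Or.inl hb)⟩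
        · rintro ⟨hg, hb⟩
          rcases List.mem_append.mp hb with hb | hb
          · exact ⟨hg, hb⟩
          · rw [List.mem_singleton.mp hb] at hg
            exact absurd hg hgoodc
      rw [pvLab_congr (pvGood_mem_grid hpg) (fun q => pvRG_congr hSiff)]

-- ---------- small helpers for B's port pieces ----------

-- the grouping pass: per-key running sums
lemma pvSumsFold (w : (Int × Int) → Int) (ℓ : Int) :
    ∀ (l : List ((Int × Int) × Int)) (d : PySem.Dict Int Int),
    (l.foldl (fun d pl => d.insert pl.2 (d.getD pl.2 0 + w pl.1)) d).getD ℓ 0 =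
      d.getD ℓ 0 + ((l.filter (fun pl => pl.2 == ℓ)).map (fun pl => w pl.1)).sum := by
  intro l
  induction l with
  | nil => intro d; simp
  | cons pl l ih =>
    intro d
    rw [List.foldl_cons, ih]
    by_cases h : pl.2 = ℓ
    · subst h
      simp [PySem.Dict.getD_insert_self]
      ring
    · have hb : (pl.2 == ℓ) = false := by simp [h]
      simp only [List.filter_cons, hb, Bool.false_eq_true, if_false]
      rw [PySem.Dict.getD_insert_of_ne _ _ _ (fun he => h he.symm)]

-- a leader's label is its own index
lemma pvLead_lab {maps : List String} {n m : Int} {c : Int × Int} (hg : pvGood maps n m c) :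
    (pvLead maps n m c ↔ pvLab n m (pvGood maps n m) c = pvIdx m c) := by
  constructor
  · intro hld
    apply pvLab_eq_of
    · exact ⟨c, mem_pvClassF.mpr ⟨pvGood_mem_grid hg, Relation.ReflTransGen.refl⟩, rfl⟩
    · intro q hq
      exact hld.2 q (mem_pvClassF.mp hq).2
  · intro hlb
    refine ⟨hg, fun q hq => ?_⟩
    have hqg : q ∈ pvGrid n m := by
      rcases pvRG_right hq with rfl | hqgood
      · exact pvGood_mem_grid hg
      · exact pvGood_mem_grid hqgood
    have := (pvLab_spec (S := pvGood maps n m) (pvGood_mem_grid hg)).2 q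
      (mem_pvClassF.mpr ⟨hqg, hq⟩)
    omega

-- first occurrences of the final labels along the scan are exactly the leaders
lemma pvFirstOcc (maps : List String) (n m : Int) :
    ∀ (u rest : List (Int × Int)), pvPairs n m = u ++ rest →
    PySem.Set.ofList ((u.filter (pvGoodB maps n m)).map (pvLab n m (pvGood maps n m))) =
      ((u.filter (pvGoodB maps n m)).filter
          (fun c => @decide (pvLead maps n m c) (Classical.propDecidable _))).map
        (pvLab n m (pvGood maps n m)) := by
  intro u
  induction u using List.reverseRecOn with
  | nil =>
    intro rest h
    simp
  | append_singleton u c ih =>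
    intro rest h
    rw [List.append_assoc] at h
    have hih := ih (c :: rest) h
    obtain ⟨hcg, hu, hfull, hcnotu⟩ := pvPrefix_facts h
    by_cases hgb : pvGoodB maps n m c = true
    · have hgc : pvGood maps n m c := pvGoodB_iff.mp hgb
      have hfilter : (u ++ [c]).filter (pvGoodB maps n m) =
          u.filter (pvGoodB maps n m) ++ [c] := by
        rw [List.filter_append]
        congr 1
        simp [hgb]
      rw [hfilter, List.map_append, List.map_cons, List.map_nil,
        PySem.Set.ofList_append_singleton, hih]
      by_cases hld : pvLead maps n m c
      · have hlc : pvLab n m (pvGood maps n m) c = pvIdx m c := (pvLead_lab hgc).mp hld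
        have hnotmem : pvLab n m (pvGood maps n m) c ∉
            ((u.filter (pvGoodB maps n m)).filter
              (fun c' => @decide (pvLead maps n m c') (Classical.propDecidable _))).map
              (pvLab n m (pvGood maps n m)) := by
          intro hmem
          obtain ⟨p, hp, hpl⟩ := List.mem_map.mp hmem
          have hpu : p ∈ u := (List.mem_filter.mp (List.mem_filter.mp hp).1).1
          have hpg : pvGood maps n m p :=
            pvGoodB_iff.mp (List.mem_filter.mp (List.mem_filter.mp hp).1).2
          have h1 : pvLab n m (pvGood maps n m) p ≤ pvIdx m p := pvLab_le_idx (pvGood_mem_grid hpg)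
          have h2 := (hu p hpu).2
          omega
        rw [PySem.Set.add_of_not_mem hnotmem]
        have hfl : ((u.filter (pvGoodB maps n m) ++ [c]).filter
            (fun c' => @decide (pvLead maps n m c') (Classical.propDecidable _))) =
            (u.filter (pvGoodB maps n m)).filter
              (fun c' => @decide (pvLead maps n m c') (Classical.propDecidable _)) ++ [c] := by
          rw [List.filter_append]
          congr 1
          have hd : (@decide (pvLead maps n m c) (Classical.propDecidable _)) = true :=
            @decide_eq_true _ (Classical.propDecidable _) hld
          simp [hd]
        rw [hfl, List.map_append, List.map_cons, List.map_nil]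
      · have hlc : pvLab n m (pvGood maps n m) c < pvIdx m c := by
          have h1 : pvLab n m (pvGood maps n m) c ≤ pvIdx m c := pvLab_le_idx hcg
          have h2 : pvLab n m (pvGood maps n m) c ≠ pvIdx m c :=
            fun he => hld ((pvLead_lab hgc).mpr he)
          omega
        obtain ⟨⟨r, hr, hrv⟩, _⟩ := pvLab_spec (S := pvGood maps n m) hcg
        obtain ⟨hrg, hrr⟩ := mem_pvClassF.mp hr
        have hrgood : pvGood maps n m r := by
          rcases pvRG_right hrr with rfl | hg
          · exact hgc
          · exact hg
        have hru : r ∈ u := hfull r hrg (by omega)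
        have hlr : pvLab n m (pvGood maps n m) r = pvLab n m (pvGood maps n m) c :=
          (pvLab_eq_of_R hgc hrgood hrg hrr).symm
        have hrlead : pvLead maps n m r := by
          apply (pvLead_lab hrgood).mpr
          omega
        have hmem : pvLab n m (pvGood maps n m) c ∈
            ((u.filter (pvGoodB maps n m)).filter
              (fun c' => @decide (pvLead maps n m c') (Classical.propDecidable _))).map
              (pvLab n m (pvGood maps n m)) := by
          refine List.mem_map.mpr ⟨r, ?_, hlr⟩
          refine List.mem_filter.mpr ⟨List.mem_filter.mpr ⟨hru, pvGoodB_iff.mpr hrgood⟩, ?_⟩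
          exact @decide_eq_true _ (Classical.propDecidable _) hrlead
        rw [PySem.Set.add_of_mem hmem]
        have hfl : ((u.filter (pvGoodB maps n m) ++ [c]).filter
            (fun c' => @decide (pvLead maps n m c') (Classical.propDecidable _))) =
            (u.filter (pvGoodB maps n m)).filter
              (fun c' => @decide (pvLead maps n m c') (Classical.propDecidable _)) := by
          rw [List.filter_append]
          have hd : (@decide (pvLead maps n m c) (Classical.propDecidable _)) = false :=
            @decide_eq_false _ (Classical.propDecidable _) hld
          simp [hd]
        rw [hfl]
    · have hfilter : (u ++ [c]).filter (pvGoodB maps n m) = u.filter (pvGoodB maps n m) := by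
        rw [List.filter_append]
        have : pvGoodB maps n m c = false := Bool.eq_false_iff.mpr hgb
        simp [this]
      rw [hfilter, hih]

-- the component of a leader c is exactly the set of digit cells labeled with idx c
lemma pvClass_filter {maps : List String} {n m : Int} {c : Int × Int}
    (hld : pvLead maps n m c) :
    ∀ q, q ∈ pvClassF n m (pvGood maps n m) c ↔
      (pvGood maps n m q ∧ pvLab n m (pvGood maps n m) q = pvIdx m c) := by
  have hg := hld.1
  have hlc := (pvLead_lab hg).mp hld
  intro q
  rw [mem_pvClassF]
  constructor
  · rintro ⟨hqg, hr⟩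
    have hqgood : pvGood maps n m q := by
      rcases pvRG_right hr with rfl | h
      · exact hg
      · exact h
    refine ⟨hqgood, ?_⟩
    rw [← hlc]
    exact pvLab_eq_of_R hqgood hg (pvGood_mem_grid hg) (pvRG_symm hg hr)
  · rintro ⟨hqgood, hlq⟩
    refine ⟨pvGood_mem_grid hqgood, ?_⟩
    have : pvLab n m (pvGood maps n m) q = pvLab n m (pvGood maps n m) c := by rw [hlq, hlc]
    exact pvRG_symm hqgood (pvLab_inj hqgood hg (pvGood_mem_grid hqgood) (pvGood_mem_grid hg) this)

-- a nested scan over rows and columns is the scan over all cells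
lemma pvNestedFold_eq {sigma : Type} (n m : Int) (f : sigma → (Int × Int) → sigma) (init : sigma) :
    (PySem.List.pyRange 0 n 1).foldl (fun s i =>
      (PySem.List.pyRange 0 m 1).foldl (fun s j => f s (i, j)) s) init =
    (pvPairs n m).foldl f init := by
  rw [pvPairs, List.foldl_flatMap]
  simp only [List.foldl_map]

-- B's grouping pass over the final labels produces exactly A's answer list
lemma pvValuesEq (maps : List String) (n m : Int) :
    ((((pvPairs n m).filter (pvGoodB maps n m)).map
        (fun p => (p, pvLab n m (pvGood maps n m) p))).foldl
      (fun sums pl => sums.insert pl.2 (sums.getD pl.2 0 + pvIntA (pvCellA maps pl.1.1 pl.1.2)))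
      PySem.Dict.empty).values = pvAnsSpec maps n m (pvPairs n m) := by
  set gAll := (pvPairs n m).filter (pvGoodB maps n m) with hgAll
  set L := pvLab n m (pvGood maps n m) with hL
  set l := gAll.map (fun p => (p, L p)) with hl
  set sums := l.foldl
      (fun sums pl => sums.insert pl.2 (sums.getD pl.2 0 + pvIntA (pvCellA maps pl.1.1 pl.1.2)))
      PySem.Dict.empty with hsums
  have hgnd : gAll.Nodup := (pvPairs_nodup n m).filter _
  have hkeys : sums.keys = PySem.Set.ofList (gAll.map L) := by
    rw [hsums, PySem.Dict.keys_foldl_insert_key l (fun pl => pl.2)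
      (fun d pl => d.getD pl.2 0 + pvIntA (pvCellA maps pl.1.1 pl.1.2)) PySem.Dict.empty]
    rw [show (PySem.Dict.empty : PySem.Dict Int Int).keys = [] from rfl,
      PySem.Set.update_nil_left, hl, List.map_map]
    rfl
  have hknd : sums.keys.Nodup := by
    rw [hsums]
    exact PySem.Dict.nodup_keys_foldl_insert_key l (fun pl => pl.2) _ _ (by
      rw [show (PySem.Dict.empty : PySem.Dict Int Int).keys = [] from rfl]
      exact List.nodup_nil)
  have hgetD : ∀ lv : Int, sums.getD lv 0 =
      ((gAll.filter (fun q => L q == lv)).map (pvVal maps)).sum := by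
    intro lv
    rw [hsums, pvSumsFold (fun p => pvIntA (pvCellA maps p.1 p.2)) lv]
    rw [show (PySem.Dict.empty : PySem.Dict Int Int).getD lv 0 = 0 from rfl]
    rw [hl, List.filter_map, List.map_map]
    simp only [Function.comp, zero_add]
    rfl
  have hvals : sums.values = sums.keys.map (fun k => sums.getD k 0) :=
    PySem.Dict.values_eq_map_keys sums hknd 0
  have hfirst := pvFirstOcc maps n m (pvPairs n m) [] (by rw [List.append_nil])
  have hleaders : (pvPairs n m).filter
      (fun c => @decide (pvLead maps n m c) (Classical.propDecidable _)) =
      gAll.filter (fun c => @decide (pvLead maps n m c) (Classical.propDecidable _)) := by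
    rw [hgAll, List.filter_filter]
    apply List.filter_congr
    intro a _
    by_cases hld : pvLead maps n m a
    · have hd : (@decide (pvLead maps n m a) (Classical.propDecidable _)) = true :=
        @decide_eq_true _ (Classical.propDecidable _) hld
      have hg : pvGoodB maps n m a = true := pvGoodB_iff.mpr hld.1
      rw [hd, hg]
      rfl
    · have hd : (@decide (pvLead maps n m a) (Classical.propDecidable _)) = false :=
        @decide_eq_false _ (Classical.propDecidable _) hld
      rw [hd]
      rfl
  rw [hvals, hkeys, hfirst, List.map_map]
  unfold pvAnsSpec
  rw [hleaders]
  apply List.map_congr_left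
  intro c hc
  obtain ⟨hcmem, hcdec⟩ := List.mem_filter.mp hc
  have hld : pvLead maps n m c := @of_decide_eq_true _ (Classical.propDecidable _) hcdec
  have hgc : pvGood maps n m c := hld.1
  simp only [Function.comp]
  rw [hgetD (L c)]
  have hlc : L c = pvIdx m c := (pvLead_lab hgc).mp hld
  have hfnd : (gAll.filter (fun q => L q == L c)).Nodup := hgnd.filter _
  have hset : (gAll.filter (fun q => L q == L c)).toFinset =
      pvClassF n m (pvGood maps n m) c := by
    apply Finset.ext
    intro q
    rw [List.mem_toFinset, List.mem_filter, pvClass_filter hld q]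
    constructor
    · rintro ⟨hq1, hq2⟩
      have hqg : pvGood maps n m q :=
        pvGoodB_iff.mp (List.mem_filter.mp hq1).2
      refine ⟨hqg, ?_⟩
      have h3 : L q = L c := eq_of_beq hq2
      rw [← hlc]
      exact h3
    · rintro ⟨hqg, hq2⟩
      refine ⟨List.mem_filter.mpr ⟨mem_pvPairs.mpr (pvGood_mem_grid hqg), pvGoodB_iff.mpr hqg⟩, ?_⟩
      rw [beq_iff_eq, hlc]
      exact hq2
  unfold pvCompSum
  rw [← hset, List.sum_toFinset _ hfnd]

-- ===== VERDICT (by name: the statement is the Claim_ definition above) =====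
theorem solution_spec : Claim_equal_solution := by
  intro maps _hdom _hpre
  unfold Spec_solution
  set n : Int := (maps.length : Int) with hn
  set m : Int := PySem.Str.len ((PySem.List.pyGet? maps 0).getD "") with hm
  have h0A : solution maps =
      (if ((pvPairs n m).foldl (pvStepOutA maps n m) (([] : List Int), pvVisit0 n m)).1 ≠ [] then PySem.List.sorted ((pvPairs n m).foldl (pvStepOutA maps n m) (([] : List Int), pvVisit0 n m)).1 (fun x => x) false else [-1]) := by
    show (if ((PySem.List.pyRange 0 n 1).foldl (fun st i => (PySem.List.pyRange 0 m 1).foldl (fun st j => pvStepOutA maps n m st (i, j)) st) (([] : List Int), pvVisit0 n m)).1 ≠ [] then PySem.List.sorted ((PySem.List.pyRange 0 n 1).foldl (fun st i => (PySem.List.pyRange 0 m 1).foldl (fun st j => pvStepOutA maps n m st (i, j)) st) (([] : List Int), pvVisit0 n m)).1 (fun x => x) false else [-1]) = _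
    rw [pvNestedFold_eq]
  have h0B : solution_alt maps =
      (if (((pvPairs n m).foldl (pvStepOutB maps m) PySem.Dict.empty).items.foldl (fun sums pl => sums.insert pl.2 (sums.getD pl.2 0 + pvIntA (pvCellA maps pl.1.1 pl.1.2))) PySem.Dict.empty).items ≠ [] then PySem.List.sorted (((pvPairs n m).foldl (pvStepOutB maps m) PySem.Dict.empty).items.foldl (fun sums pl => sums.insert pl.2 (sums.getD pl.2 0 + pvIntA (pvCellA maps pl.1.1 pl.1.2))) PySem.Dict.empty).values (fun x => x) false else [-1]) := by
    show (if (((PySem.List.pyRange 0 n 1).foldl (fun labels i => (PySem.List.pyRange 0 m 1).foldl (fun labels j => pvStepOutB maps m labels (i, j)) labels) PySem.Dict.empty).items.foldl (fun sums pl => sums.insert pl.2 (sums.getD pl.2 0 + pvIntA (pvCellA maps pl.1.1 pl.1.2))) PySem.Dict.empty).items ≠ [] then PySem.List.sorted (((PySem.List.pyRange 0 n 1).foldl (fun labels i => (PySem.List.pyRange 0 m 1).foldl (fun labels j => pvStepOutB maps m labels (i, j)) labels) PySem.Dict.empty).items.foldl (fun sums pl => sums.insert pl.2 (sums.getD pl.2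 0 + pvIntA (pvCellA maps pl.1.1 pl.1.2))) PySem.Dict.empty).values (fun x => x) false else [-1]) = _
    rw [pvNestedFold_eq]
  rw [h0A, h0B]
  have hA := pvAScan maps n m (pvPairs n m) [] (by rw [List.append_nil])
  have hB := pvBScan maps n m (pvPairs n m) [] (by rw [List.append_nil])
  have hGSiff : ∀ b, pvGS maps n m (pvPairs n m) b ↔ pvGood maps n m b := by
    intro b
    exact ⟨fun h => h.1, fun h => ⟨h, mem_pvPairs.mpr (pvGood_mem_grid h)⟩⟩
  have hBitems : ((pvPairs n m).foldl (pvStepOutB maps m) PySem.Dict.empty).items = (((pvPairs n m).filter (pvGoodB maps n m)).map (fun p => (p, pvLab n m (pvGood maps n m) p))) := by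
    rw [hB]
    apply List.map_congr_left
    intro p hp
    have hpg : pvGood maps n m p := pvGoodB_iff.mp (List.mem_filter.mp hp).2
    rw [pvLab_congr (pvGood_mem_grid hpg) (fun q => pvRG_congr hGSiff)]
  rw [hA.2.2, hBitems]
  have hV : ((((pvPairs n m).filter (pvGoodB maps n m)).map (fun p => (p, pvLab n m (pvGood maps n m) p))).foldl (fun sums pl => sums.insert pl.2 (sums.getD pl.2 0 + pvIntA (pvCellA maps pl.1.1 pl.1.2))) PySem.Dict.empty).values = pvAnsSpec maps n m (pvPairs n m) := pvValuesEq maps n m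
  have hnil : ((((pvPairs n m).filter (pvGoodB maps n m)).map (fun p => (p, pvLab n m (pvGood maps n m) p))).foldl (fun sums pl => sums.insert pl.2 (sums.getD pl.2 0 + pvIntA (pvCellA maps pl.1.1 pl.1.2))) PySem.Dict.empty).items = [] ↔ pvAnsSpec maps n m (pvPairs n m) = [] := by
    rw [← hV]
    show _ ↔ (((((pvPairs n m).filter (pvGoodB maps n m)).map (fun p => (p, pvLab n m (pvGood maps n m) p))).foldl (fun sums pl => sums.insert pl.2 (sums.getD pl.2 0 + pvIntA (pvCellA maps pl.1.1 pl.1.2))) PySem.Dict.empty).items.map (fun pr => pr.2)) = []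
    rw [List.map_eq_nil_iff]
  by_cases hempty : pvAnsSpec maps n m (pvPairs n m) = []
  · rw [if_neg (by simpa using hempty), if_neg (by simpa using hnil.mpr hempty)]
  · rw [if_pos hempty, if_pos (fun hi => hempty (hnil.mp hi)), hV]
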